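-- pv_equiv track=rewrite | github.com/luckypdc0625/programmers_vscode | 154540.py | solution
-- ===== SOURCE A (Python) =====
-- from collections import deque
--
-- def solution(maps):
--     def bfs(start_x, start_y):
--         queue = deque([(start_x, start_y)])
--         total_food = 0
--         while queue:
--             x, y = queue.popleft()
--             if visited[x][y]:
--                 continue
--             visited[x][y] = True
--             total_food += int(maps[x][y])
--
--             for dx, dy in [(-1, 0), (1, 0), (0, -1), (0, 1)]:
--                 nx, ny = x + dx, y + dy
--                 if 0 <= nx < len(maps) and 0 <= ny < len(maps[0]) and not visited[nx][ny] and maps[nx][ny] != 'X':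
--                     queue.append((nx, ny))
--
--         return total_food
--
--     if not maps:
--         return [-1]
--
--     visited = [[False] * len(maps[0]) for _ in range(len(maps))]
--     result = []
--
--     for i in range(len(maps)):
--         for j in range(len(maps[0])):
--             if maps[i][j] != 'X' and not visited[i][j]:
--                 days = bfs(i, j)
--                 result.append(days)
--
--     if not result:
--         return [-1]
--
--     return sorted(result)
-- ===== SOURCE B (Python) =====
-- def solution(maps):
--     if not maps:
--         return [-1]
--     h, w = len(maps), len(maps[0])
--     n = h * w
--     parent = list(range(n))
--
--     def find(x):
--         while parent[x] != x:
--             x = parent[x]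
--         return x
--
--     def union(a, b):
--         ra, rb = find(a), find(b)
--         if ra != rb:
--             if ra < rb:
--                 parent[rb] = ra
--             else:
--                 parent[ra] = rb
--
--     for i in range(h):
--         for j in range(w):
--             if maps[i][j] != 'X':
--                 if j + 1 < w and maps[i][j + 1] != 'X':
--                     union(i * w + j, i * w + j + 1)
--                 if i + 1 < h and maps[i + 1][j] != 'X':
--                     union(i * w + j, (i + 1) * w + j)
--
--     sums = {}
--     for i in range(h):
--         for j in range(w):
--             if maps[i][j] != 'X':
--                 r = find(i * w + j)
--                 sums[r] = sums.get(r, 0) + int(maps[i][j])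
--
--     if not sums:
--         return [-1]
--     return sorted(sums.values())
-- ===== Notes on version B (the rewrite author's own statement) =====
-- stated objective: alternative
-- what changed: Replaces the BFS flood fill with a mutable visited matrix by a union-find (disjoint-set forest) over flat indices: one pass unions each non-X cell with its right and down non-X neighbours, a second pass accumulates int(maps[i][j]) into a dict keyed by the cell's root; Pre_ excludes exactly the inputs where A raises (a row shorter than the first row, or a non-X cell that is not a digit).
import Mathlib
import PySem

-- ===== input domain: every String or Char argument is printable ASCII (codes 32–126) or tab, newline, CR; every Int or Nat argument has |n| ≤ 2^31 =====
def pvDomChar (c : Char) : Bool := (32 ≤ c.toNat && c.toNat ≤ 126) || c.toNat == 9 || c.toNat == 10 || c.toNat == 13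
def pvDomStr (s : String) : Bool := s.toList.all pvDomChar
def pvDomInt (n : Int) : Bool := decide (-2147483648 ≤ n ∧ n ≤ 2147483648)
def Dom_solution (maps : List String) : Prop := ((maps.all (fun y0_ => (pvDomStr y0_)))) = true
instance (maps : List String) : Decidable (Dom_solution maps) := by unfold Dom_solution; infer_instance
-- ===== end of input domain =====

-- B replaces A's BFS flood fill (deque + mutable visited matrix) by a union-find over flat
-- cell indices (union right/down neighbours, then accumulate sums per root in a dict);
-- objective: alternative — a genuinely different algorithm of similar cost.

-- ===== PORT A =====
def pvCell (maps : List String) (x y : ℕ) : Char := ((maps.getD x "").toList).getD y 'X'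

def pvVal (maps : List String) (x y : ℕ) : Int := (PySem.Int.ofChars? [pvCell maps x y]).getD 0

def cellsList (h w : ℕ) : List (ℕ × ℕ) := (List.range h).flatMap (fun i => (List.range w).map (fun j => (i, j)))

-- model

def visGet (vis : List (List Bool)) (x y : ℕ) : Bool := (vis.getD x []).getD y false


def visSet (vis : List (List Bool)) (x y : ℕ) : List (List Bool) :=
  vis.set x ((vis.getD x []).set y true)


def castC (c : ℕ × ℕ) : Int × Int := ((c.1 : Int), (c.2 : Int))


def nbrsOf (maps : List String) (h w : ℕ) (vis' : List (List Bool)) (x y : Int) : List (Int × Int) :=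
  ([(-1, 0), (1, 0), (0, -1), (0, 1)] : List (Int × Int)).filterMap (fun d =>
    if 0 ≤ x + d.1 ∧ x + d.1 < (h : Int) ∧ 0 ≤ y + d.2 ∧ y + d.2 < (w : Int) ∧
        visGet vis' (x + d.1).toNat (y + d.2).toNat = false ∧
        pvCell maps (x + d.1).toNat (y + d.2).toNat ≠ 'X' then
      some (x + d.1, y + d.2)
    else none)


def bfsA (maps : List String) (h w : ℕ) : ℕ → List (Int × Int) → List (List Bool) → Int → (List (List Bool)) × Int
  | 0, _, vis, tot => (vis, tot)
  | _ + 1, [], vis, tot => (vis, tot)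
  | f + 1, (x, y) :: q, vis, tot =>
    if visGet vis x.toNat y.toNat then bfsA maps h w f q vis tot
    else
      let vis' := visSet vis x.toNat y.toNat
      let tot' := tot + pvVal maps x.toNat y.toNat
      bfsA maps h w f (q ++ nbrsOf maps h w vis' x y) vis' tot'


def scanA (maps : List String) (h w : ℕ) :
    List (ℕ × ℕ) → List (List Bool) → List Int → (List (List Bool)) × List Int
  | [], vis, res => (vis, res)
  | (i, j) :: rest, vis, res =>
    if pvCell maps i j ≠ 'X' ∧ visGet vis i j = false then
      let st := bfsA maps h w (4 * h * w + 1) [castC (i, j)] vis 0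
      scanA maps h w rest st.1 (res ++ [st.2])
    else scanA maps h w rest vis res


def solution (maps : List String) : List Int :=
  if maps = [] then [-1]
  else
    let h := maps.length
    let w := (maps.headD "").toList.length
    let st := scanA maps h w (cellsList h w) (List.replicate h (List.replicate w false)) []
    if st.2 = [] then [-1] else PySem.List.sorted st.2 (fun x => x) false


-- ===== PORT B =====
def pfind (parent : List ℕ) : ℕ → ℕ → ℕ
  | 0, x => x
  | f + 1, x =>
    let px := parent.getD x x
    if px = x then x else pfind parent f px


def punion (parent : List ℕ) (a b : ℕ) : List ℕ :=
  let ra := pfind parent (a + 1) a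
  let rb := pfind parent (b + 1) b
  if ra = rb then parent
  else if ra < rb then parent.set rb ra else parent.set ra rb


def unionScan (maps : List String) (h w : ℕ) : List (ℕ × ℕ) → List ℕ → List ℕ
  | [], p => p
  | (i, j) :: rest, p =>
    if pvCell maps i j ≠ 'X' then
      let p1 := if j + 1 < w ∧ pvCell maps i (j + 1) ≠ 'X' then
        punion p (i * w + j) (i * w + j + 1) else p
      let p2 := if i + 1 < h ∧ pvCell maps (i + 1) j ≠ 'X' then
        punion p1 (i * w + j) ((i + 1) * w + j) else p1
      unionScan maps h w rest p2
    else unionScan maps h w rest p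


def sumScan (maps : List String) (h w : ℕ) (p : List ℕ) :
    List (ℕ × ℕ) → PySem.Dict ℕ Int → PySem.Dict ℕ Int
  | [], d => d
  | (i, j) :: rest, d =>
    if pvCell maps i j ≠ 'X' then
      let r := pfind p (i * w + j + 1) (i * w + j)
      sumScan maps h w p rest (d.insert r (d.getD r 0 + pvVal maps i j))
    else sumScan maps h w p rest d


def solution_alt (maps : List String) : List Int :=
  if maps = [] then [-1]
  else
    let h := maps.length
    let w := (maps.headD "").toList.length
    let parent := unionScan maps h w (cellsList h w) (List.range (h * w))
    let sums := sumScan maps h w parent (cellsList h w) PySem.Dict.empty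
    if sums.values = [] then [-1] else PySem.List.sorted sums.values (fun x => x) false


-- ===== PRECONDITION & SPEC =====
-- Pre_ excludes exactly the inputs on which the Python A raises: a row shorter than the
-- first row (IndexError on maps[i][j]) or a non-X cell among the first len(maps[0])
-- columns that is not a decimal digit (ValueError in int()). A returns on all other inputs.
def Pre_solution (maps : List String) : Prop :=
  maps = [] ∨
    ((∀ s ∈ maps, (maps.headD "").toList.length ≤ s.toList.length) ∧
     ∀ s ∈ maps, ∀ j < (maps.headD "").toList.length,
       (s.toList.getD j 'X') = 'X' ∨ ('0' ≤ s.toList.getD j 'X' ∧ s.toList.getD j 'X' ≤ '9'))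
instance (maps : List String) : Decidable (Pre_solution maps) := by unfold Pre_solution; infer_instance

def pvWitness_solution : List String := ["12X", "3XX", "X45"]

def Spec_solution (maps : List String) (out : List Int) : Prop := out = solution_alt maps
instance (maps : List String) (out : List Int) : Decidable (Spec_solution maps out) := by unfold Spec_solution; infer_instance

-- ===== CLAIM (what is proved, stated in full; the proofs are below) =====
def Claim_equal_solution : Prop := ∀ (maps : List String), Dom_solution maps → Pre_solution maps → Spec_solution maps (solution maps)

-- ===== LEMMAS AND PROOFS =====
def opC (maps : List String) (h w : ℕ) (c : ℕ × ℕ) : Prop :=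
  c.1 < h ∧ c.2 < w ∧ pvCell maps c.1 c.2 ≠ 'X'


def adjC (maps : List String) (h w : ℕ) (c d : ℕ × ℕ) : Prop :=
  opC maps h w c ∧ opC maps h w d ∧
  ((d.1 = c.1 + 1 ∧ d.2 = c.2) ∨ (c.1 = d.1 + 1 ∧ c.2 = d.2) ∨
   (d.2 = c.2 + 1 ∧ d.1 = c.1) ∨ (c.2 = d.2 + 1 ∧ c.1 = d.1))


def ReachC (maps : List String) (h w : ℕ) : ℕ × ℕ → ℕ × ℕ → Prop :=
  Relation.ReflTransGen (adjC maps h w)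


def encC (w : ℕ) (c : ℕ × ℕ) : ℕ := c.1 * w + c.2


def leadC (maps : List String) (h w : ℕ) (c : ℕ × ℕ) : Prop :=
  opC maps h w c ∧ ∀ d, ReachC maps h w c d → encC w c ≤ encC w d


noncomputable def leadersL (maps : List String) (h w : ℕ) : List (ℕ × ℕ) :=
  (cellsList h w).filter (fun c => @decide (leadC maps h w c) (Classical.propDecidable _))


noncomputable def compSumL (maps : List String) (h w : ℕ) (c : ℕ × ℕ) : Int :=
  (((cellsList h w).filter (fun x => @decide (ReachC maps h w c x) (Classical.propDecidable _))).map
    (fun x => pvVal maps x.1 x.2)).sum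


noncomputable def canonical (maps : List String) (h w : ℕ) : List Int :=
  (leadersL maps h w).map (compSumL maps h w)

-- basic facts

theorem adjC_symm (maps : List String) (h w : ℕ) (c d : ℕ × ℕ) (hcd : adjC maps h w c d) :
    adjC maps h w d c := by
  obtain ⟨h1, h2, h3⟩ := hcd; exact ⟨h2, h1, by tauto⟩


theorem reach_symm (maps : List String) (h w : ℕ) {c d : ℕ × ℕ} (hcd : ReachC maps h w c d) :
    ReachC maps h w d c :=
  (Relation.ReflTransGen.symmetric (fun _ _ => adjC_symm maps h w _ _)) hcd


theorem reach_open (maps : List String) (h w : ℕ) {c d : ℕ × ℕ} (hc : opC maps h w c)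
    (hcd : ReachC maps h w c d) : opC maps h w d := by
  induction hcd with
  | refl => exact hc
  | tail _ hstep ih => exact hstep.2.1


theorem mem_cellsList {h w : ℕ} {c : ℕ × ℕ} : c ∈ cellsList h w ↔ c.1 < h ∧ c.2 < w := by
  cases c with
  | mk i j =>
    simp [cellsList, List.mem_flatMap]


theorem cellsList_nodup (h w : ℕ) : (cellsList h w).Nodup := by
  unfold cellsList
  apply List.nodup_flatMap.mpr
  constructor
  · intro i _
    exact (List.nodup_range).map (fun a b hab => by simpa using congrArg Prod.snd hab)
  · -- pairwise disjoint
    apply List.Pairwise.imp ?_ (List.pairwise_lt_range (n := h))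
    intro a b hab
    simp only [List.Disjoint]
    intro x hx hy
    simp only [List.mem_map, List.mem_range] at hx hy
    obtain ⟨j1, _, rfl⟩ := hx
    obtain ⟨j2, _, h2⟩ := hy
    have := congrArg Prod.fst h2
    simp at this
    omega


theorem cellsList_sorted_enc (h w : ℕ) : (cellsList h w).Pairwise (fun a b => encC w a < encC w b) := by
  unfold cellsList
  apply List.pairwise_flatMap.mpr
  constructor
  · intro i _
    apply List.Pairwise.map
    · intro a b hab
      simpa [encC] using hab
    · exact List.pairwise_lt_range
  · apply List.Pairwise.imp ?_ (List.pairwise_lt_range (n := h))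
    intro a b hab
    intro x hx y hy
    simp only [List.mem_map, List.mem_range] at hx hy
    obtain ⟨j1, hj1, rfl⟩ := hx
    obtain ⟨j2, hj2, rfl⟩ := hy
    simp only [encC]
    have h1 : (a+1) * w = a * w + w := by ring
    have h2 : (a+1) * w ≤ b * w := Nat.mul_le_mul_right w (by omega)
    omega

-- ===== visited matrix =====

theorem getD_set_self {α : Type} (l : List α) (i : ℕ) (v d : α) (h : i < l.length) :
    (l.set i v).getD i d = v := by
  simp [List.getD, List.getElem?_set_self, h]


theorem getD_set_ne {α : Type} (l : List α) (i j : ℕ) (v d : α) (h : i ≠ j) :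
    (l.set i v).getD j d = l.getD j d := by
  simp [List.getD, List.getElem?_set_ne h]


theorem visSet_length (vis : List (List Bool)) (x y : ℕ) :
    (visSet vis x y).length = vis.length := by simp [visSet]


theorem getD_mem' {α : Type} (l : List α) (i : ℕ) (d : α) (h : i < l.length) : l.getD i d ∈ l := by
  rw [List.getD_eq_getElem l d h]; exact List.getElem_mem _


theorem visSet_rows (vis : List (List Bool)) (x y w : ℕ) (hw : ∀ r ∈ vis, r.length = w) :
    ∀ r ∈ visSet vis x y, r.length = w := by
  intro r hr
  by_cases hx : x < vis.length
  · rcases List.mem_or_eq_of_mem_set hr with h | h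
    · exact hw r h
    · subst h
      simp only [List.length_set]
      exact hw _ (getD_mem' _ _ _ hx)
  · rw [visSet, List.set_eq_of_length_le (by omega)] at hr
    exact hw r hr


theorem visGet_visSet (vis : List (List Bool)) (h w x y a b : ℕ)
    (hlen : vis.length = h) (hrow : ∀ r ∈ vis, r.length = w)
    (hx : x < h) (hy : y < w) :
    visGet (visSet vis x y) a b = if a = x ∧ b = y then true else visGet vis a b := by
  unfold visGet visSet
  by_cases hax : a = x
  · rw [hax]
    have hxlen : x < vis.length := by omega
    rw [getD_set_self _ _ _ _ hxlen]
    by_cases hby : b = y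
    · rw [hby]
      have hylen : y < (vis.getD x []).length := by
        rw [hrow _ (getD_mem' _ _ _ hxlen)]; omega
      rw [getD_set_self _ _ _ _ hylen]
      simp [hax, hby]
    · rw [getD_set_ne _ _ _ _ _ (fun hh => hby hh.symm)]
      simp [hby]
  · rw [getD_set_ne _ _ _ _ _ (fun hh => hax hh.symm)]
    simp [hax]


theorem visGet_replicate (h w x y : ℕ) :
    visGet (List.replicate h (List.replicate w false)) x y = false := by
  unfold visGet
  rcases lt_or_ge x h with hx | hx
  · rw [List.getD_replicate _ (by simpa using hx)]
    rcases lt_or_ge y w with hy | hy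
    · rw [List.getD_replicate _ (by simpa using hy)]
    · exact List.getD_eq_default _ _ (by simpa using hy)
  · rw [List.getD_eq_default (List.replicate h (List.replicate w false)) [] (by simpa using hx)]
    rfl


theorem visGet_true_bounds (vis : List (List Bool)) (h w x y : ℕ)
    (hlen : vis.length = h) (hrow : ∀ r ∈ vis, r.length = w)
    (hv : visGet vis x y = true) : x < h ∧ y < w := by
  unfold visGet at hv
  by_cases hx : x < vis.length
  · have hm := getD_mem' vis x ([] : List Bool) hx
    by_cases hy : y < (vis.getD x []).length
    · exact ⟨by omega, by rw [← hrow _ hm]; omega⟩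
    · rw [List.getD_eq_default (vis.getD x []) false (by omega)] at hv; simp at hv
  · rw [List.getD_eq_default vis [] (by omega)] at hv; simp at hv

-- ===== BFS port pieces =====

theorem castC_inj {c d : ℕ × ℕ} (hh : castC c = castC d) : c = d := by
  unfold castC at hh
  have h1 := congrArg Prod.fst hh
  have h2 := congrArg Prod.snd hh
  simp at h1 h2
  exact Prod.ext h1 h2


theorem reach_mem_closed {maps : List String} {h w : ℕ} {T : Finset (ℕ × ℕ)} {s d : ℕ × ℕ}
    (hsT : s ∈ T) (hcl : ∀ c ∈ T, ∀ d, adjC maps h w c d → d ∈ T)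
    (hr : ReachC maps h w s d) : d ∈ T := by
  induction hr with
  | refl => exact hsT
  | tail _ hstep ih => exact hcl _ ih _ hstep


theorem sum_reach_eq_compSumL (maps : List String) (h w : ℕ) (s : ℕ × ℕ) (hs : opC maps h w s)
    (T : Finset (ℕ × ℕ)) (hT : ∀ c, c ∈ T ↔ ReachC maps h w s c) :
    ∑ d ∈ T, pvVal maps d.1 d.2 = compSumL maps h w s := by
  have hT' : T = ((cellsList h w).filter
      (fun x => @decide (ReachC maps h w s x) (Classical.propDecidable _))).toFinset := by
    apply Finset.ext
    intro c
    simp only [List.mem_toFinset, List.mem_filter, decide_eq_true_eq, hT]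
    constructor
    · intro hr
      have hop := reach_open maps h w hs hr
      exact ⟨mem_cellsList.mpr ⟨hop.1, hop.2.1⟩, hr⟩
    · exact fun hh => hh.2
  rw [hT']
  rw [List.sum_toFinset _ (List.Nodup.filter _ (cellsList_nodup h w))]
  rfl


theorem length_filter_flip {α : Type} {l : List α} (hl : l.Nodup) {p p' : α → Bool} {c : α}
    (hc : c ∈ l) (hpc : p c = true) (hp'c : p' c = false)
    (hag : ∀ x ∈ l, x ≠ c → p' x = p x) :
    (l.filter p').length + 1 = (l.filter p).length := by
  induction l with
  | nil => cases hc
  | cons a t ih =>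
    rcases List.mem_cons.mp hc with rfl | hct
    · have htc : c ∉ t := (List.nodup_cons.mp hl).1
      have hft : t.filter p' = t.filter p :=
        List.filter_congr (fun x hx => hag x (List.mem_cons_of_mem _ hx)
          (fun hxc => htc (hxc ▸ hx)))
      simp [List.filter_cons, hp'c, hpc, hft]
    · have hat : a ≠ c := fun hac => (List.nodup_cons.mp hl).1 (hac ▸ hct)
      have hpa : p' a = p a := hag a List.mem_cons_self hat
      have := ih (List.nodup_cons.mp hl).2 hct
        (fun x hx hxc => hag x (List.mem_cons_of_mem _ hx) hxc)
      cases hv : p a with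
      | true => simp [List.filter_cons, hpa, hv]; omega
      | false => simp [List.filter_cons, hpa, hv]; omega


theorem mem_nbrsOf_iff {maps : List String} {h w : ℕ} {vis' : List (List Bool)} {x y : Int}
    {z : Int × Int} :
    z ∈ nbrsOf maps h w vis' x y ↔
      ∃ dd ∈ ([(-1, 0), (1, 0), (0, -1), (0, 1)] : List (Int × Int)),
        z = (x + dd.1, y + dd.2) ∧ 0 ≤ x + dd.1 ∧ x + dd.1 < (h : Int) ∧ 0 ≤ y + dd.2 ∧
        y + dd.2 < (w : Int) ∧ visGet vis' (x + dd.1).toNat (y + dd.2).toNat = false ∧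
        pvCell maps (x + dd.1).toNat (y + dd.2).toNat ≠ 'X' := by
  unfold nbrsOf
  rw [List.mem_filterMap]
  constructor
  · rintro ⟨d, hd, hfd⟩
    split_ifs at hfd with hcond
    · injection hfd with hz
      exact ⟨d, hd, hz.symm, hcond.1, hcond.2.1, hcond.2.2.1, hcond.2.2.2.1,
        hcond.2.2.2.2.1, hcond.2.2.2.2.2⟩
  · rintro ⟨d, hd, rfl, h1, h2, h3, h4, h5, h6⟩
    exact ⟨d, hd, by rw [if_pos ⟨h1, h2, h3, h4, h5, h6⟩]⟩


theorem nbrs_sound {maps : List String} {h w : ℕ} {vis' : List (List Bool)} {c : ℕ × ℕ}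
    (hc : opC maps h w c) {z : Int × Int}
    (hz : z ∈ nbrsOf maps h w vis' (c.1 : Int) (c.2 : Int)) :
    ∃ cd : ℕ × ℕ, z = castC cd ∧ adjC maps h w c cd ∧ visGet vis' cd.1 cd.2 = false := by
  rcases mem_nbrsOf_iff.mp hz with ⟨dd, hdd, rfl, h1, h2, h3, h4, h5, h6⟩
  refine ⟨(((c.1 : Int) + dd.1).toNat, ((c.2 : Int) + dd.2).toNat), ?_, ⟨hc, ⟨?_, ?_, h6⟩, ?_⟩, h5⟩
  · unfold castC
    simp [Int.toNat_of_nonneg h1, Int.toNat_of_nonneg h3]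
  · omega
  · omega
  · obtain ⟨d1, d2⟩ := dd
    simp only [List.mem_cons, List.mem_singleton, Prod.mk.injEq, List.not_mem_nil, or_false] at hdd
    rcases hdd with ⟨rfl, rfl⟩ | ⟨rfl, rfl⟩ | ⟨rfl, rfl⟩ | ⟨rfl, rfl⟩
    · right; left; constructor <;> simp <;> omega
    · left; constructor <;> simp <;> omega
    · right; right; right; constructor <;> simp <;> omega
    · right; right; left; constructor <;> simp <;> omega


theorem nbrs_complete {maps : List String} {h w : ℕ} {vis' : List (List Bool)} {c d : ℕ × ℕ}
    (hadj : adjC maps h w c d) (hvd : visGet vis' d.1 d.2 = false) :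
    castC d ∈ nbrsOf maps h w vis' (c.1 : Int) (c.2 : Int) := by
  apply mem_nbrsOf_iff.mpr
  obtain ⟨hc, hd, hgeo⟩ := hadj
  have hdh : d.1 < h := hd.1
  have hdw : d.2 < w := hd.2.1
  have hdx : pvCell maps d.1 d.2 ≠ 'X' := hd.2.2
  rcases hgeo with ⟨ha, hb⟩ | ⟨ha, hb⟩ | ⟨ha, hb⟩ | ⟨ha, hb⟩
  · refine ⟨(1, 0), by simp, ?_⟩
    have e1 : ((c.1 : Int) + 1).toNat = d.1 := by omega
    have e2 : ((c.2 : Int) + 0).toNat = d.2 := by omega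
    rw [e1, e2]
    refine ⟨?_, by omega, by omega, by omega, by omega, hvd, hdx⟩
    simp [castC, Prod.ext_iff]; constructor <;> omega
  · refine ⟨(-1, 0), by simp, ?_⟩
    have e1 : ((c.1 : Int) + (-1)).toNat = d.1 := by omega
    have e2 : ((c.2 : Int) + 0).toNat = d.2 := by omega
    rw [e1, e2]
    refine ⟨?_, by omega, by omega, by omega, by omega, hvd, hdx⟩
    simp [castC, Prod.ext_iff]; constructor <;> omega
  · refine ⟨(0, 1), by simp, ?_⟩
    have e1 : ((c.1 : Int) + 0).toNat = d.1 := by omega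
    have e2 : ((c.2 : Int) + 1).toNat = d.2 := by omega
    rw [e1, e2]
    refine ⟨?_, by omega, by omega, by omega, by omega, hvd, hdx⟩
    simp [castC, Prod.ext_iff]; constructor <;> omega
  · refine ⟨(0, -1), by simp, ?_⟩
    have e1 : ((c.1 : Int) + 0).toNat = d.1 := by omega
    have e2 : ((c.2 : Int) + (-1)).toNat = d.2 := by omega
    rw [e1, e2]
    refine ⟨?_, by omega, by omega, by omega, by omega, hvd, hdx⟩
    simp [castC, Prod.ext_iff]; constructor <;> omega


theorem bfs_final (maps : List String) (h w : ℕ) (s : ℕ × ℕ) (hs : opC maps h w s)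
    (V T : Finset (ℕ × ℕ)) (tot : Int) (vis : List (List Bool))
    (hvisIff : ∀ c : ℕ × ℕ, visGet vis c.1 c.2 = true ↔ (c ∈ V ∨ c ∈ T))
    (hT : ∀ c ∈ T, ReachC maps h w s c)
    (hcl : ∀ c ∈ T, ∀ d, adjC maps h w c d → d ∈ T)
    (hsT : s ∈ T)
    (htot : tot = ∑ d ∈ T, pvVal maps d.1 d.2) :
    tot = compSumL maps h w s ∧
      (∀ c : ℕ × ℕ, visGet vis c.1 c.2 = true ↔ (c ∈ V ∨ ReachC maps h w s c)) := by
  have hTiff : ∀ c, c ∈ T ↔ ReachC maps h w s c :=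
    fun c => ⟨hT c, reach_mem_closed hsT hcl⟩
  refine ⟨htot.trans (sum_reach_eq_compSumL maps h w s hs T hTiff), fun c => ?_⟩
  rw [hvisIff c, hTiff c]


theorem bfs_spec (maps : List String) (h w : ℕ) (s : ℕ × ℕ) (hs : opC maps h w s) :
    ∀ (f : ℕ) (q : List (Int × Int)) (vis : List (List Bool)) (tot : Int) (V T : Finset (ℕ × ℕ)),
    vis.length = h → (∀ r ∈ vis, r.length = w) →
    (∀ c : ℕ × ℕ, visGet vis c.1 c.2 = true ↔ (c ∈ V ∨ c ∈ T)) →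
    (∀ c ∈ V, ¬ ReachC maps h w s c) →
    (∀ c ∈ T, ReachC maps h w s c) →
    (∀ z ∈ q, ∃ c : ℕ × ℕ, z = castC c ∧ ReachC maps h w s c) →
    (∀ c ∈ T, ∀ d, adjC maps h w c d → d ∈ T ∨ castC d ∈ q) →
    (s ∈ T ∨ castC s ∈ q) →
    tot = ∑ d ∈ T, pvVal maps d.1 d.2 →
    4 * ((cellsList h w).filter (fun c => visGet vis c.1 c.2 = false)).length + q.length ≤ f →
    ∃ vis',
      bfsA maps h w f q vis tot = (vis', compSumL maps h w s) ∧
      vis'.length = h ∧ (∀ r ∈ vis', r.length = w) ∧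
      (∀ c : ℕ × ℕ, visGet vis' c.1 c.2 = true ↔ (c ∈ V ∨ ReachC maps h w s c)) := by
  intro f
  induction f with
  | zero =>
    intro q vis tot V T hlen hrow hvisIff hV hT hq hcl hsq htot hfuel
    have hq0 : q = [] := List.eq_nil_of_length_eq_zero (by omega)
    subst hq0
    have hsT : s ∈ T := by
      rcases hsq with hh | hh
      · exact hh
      · cases hh
    have hcl' : ∀ c ∈ T, ∀ d, adjC maps h w c d → d ∈ T := by
      intro c hc d hd
      rcases hcl c hc d hd with hh | hh
      · exact hh
      · cases hh
    obtain ⟨h1, h2⟩ := bfs_final maps h w s hs V T tot vis hvisIff hT hcl' hsT htot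
    exact ⟨vis, by rw [bfsA, h1], hlen, hrow, h2⟩
  | succ f ih =>
    intro q vis tot V T hlen hrow hvisIff hV hT hq hcl hsq htot hfuel
    match q with
    | [] =>
      have hsT : s ∈ T := by
        rcases hsq with hh | hh
        · exact hh
        · cases hh
      have hcl' : ∀ c ∈ T, ∀ d, adjC maps h w c d → d ∈ T := by
        intro c hc d hd
        rcases hcl c hc d hd with hh | hh
        · exact hh
        · cases hh
      obtain ⟨h1, h2⟩ := bfs_final maps h w s hs V T tot vis hvisIff hT hcl' hsT htot
      exact ⟨vis, by rw [bfsA, h1], hlen, hrow, h2⟩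
    | z :: q' =>
      obtain ⟨c, rfl, hreach⟩ := hq z List.mem_cons_self
      have hcop : opC maps h w c := reach_open maps h w hs hreach
      have hbfs : bfsA maps h w (f + 1) (castC c :: q') vis tot =
          if visGet vis c.1 c.2 then bfsA maps h w f q' vis tot
          else
            bfsA maps h w f
              (q' ++ nbrsOf maps h w (visSet vis c.1 c.2) (c.1 : Int) (c.2 : Int))
              (visSet vis c.1 c.2) (tot + pvVal maps c.1 c.2) := by
        show bfsA maps h w (f + 1) (((c.1 : Int), (c.2 : Int)) :: q') vis tot = _
        rw [bfsA]
        simp only [Int.toNat_natCast]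
      cases hvis : visGet vis c.1 c.2 with
      | true =>
        rw [hbfs, if_pos (by rw [hvis])]
        have hcT : c ∈ T := by
          rcases (hvisIff c).mp hvis with hh | hh
          · exact absurd hreach (hV c hh)
          · exact hh
        apply ih q' vis tot V T hlen hrow hvisIff hV hT
          (fun z hz => hq z (List.mem_cons_of_mem _ hz)) ?_ ?_ htot (by simp at hfuel ⊢; omega)
        · intro c' hc' d hd
          rcases hcl c' hc' d hd with hh | hh
          · exact Or.inl hh
          · rcases List.mem_cons.mp hh with hh2 | hh2
            · exact Or.inl (castC_inj hh2 ▸ hcT)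
            · exact Or.inr hh2
        · rcases hsq with hh | hh
          · exact Or.inl hh
          · rcases List.mem_cons.mp hh with hh2 | hh2
            · exact Or.inl (castC_inj hh2 ▸ hcT)
            · exact Or.inr hh2
      | false =>
        rw [hbfs, if_neg (by rw [hvis]; exact Bool.false_ne_true)]
        set vis' := visSet vis c.1 c.2 with hvis'def
        have hcnotVT : ¬ (c ∈ V ∨ c ∈ T) := fun hh => by
          have := (hvisIff c).mpr hh; rw [hvis] at this; cases this
        have hlen' : vis'.length = h := by rw [hvis'def, visSet_length]; exact hlen
        have hrow' : ∀ r ∈ vis', r.length = w := visSet_rows vis c.1 c.2 w hrow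
        have hget' : ∀ a b : ℕ, visGet vis' a b =
            if a = c.1 ∧ b = c.2 then true else visGet vis a b :=
          fun a b => visGet_visSet vis h w c.1 c.2 a b hlen hrow hcop.1 hcop.2.1
        have hvisIff' : ∀ d : ℕ × ℕ, visGet vis' d.1 d.2 = true ↔ (d ∈ V ∨ d ∈ insert c T) := by
          intro d
          rw [hget' d.1 d.2]
          by_cases hdc : d = c
          · subst hdc; simp
          · have : ¬ (d.1 = c.1 ∧ d.2 = c.2) := fun hh => hdc (Prod.ext hh.1 hh.2)
            rw [if_neg this, hvisIff d]
            simp [Finset.mem_insert, hdc]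
        apply ih (q' ++ nbrsOf maps h w vis' (c.1 : Int) (c.2 : Int)) vis'
          (tot + pvVal maps c.1 c.2) V (insert c T) hlen' hrow' hvisIff' hV ?hT ?hq ?hcl ?hsq ?htot ?hfuel
        case hT =>
          intro d hd
          rcases Finset.mem_insert.mp hd with rfl | hh
          · exact hreach
          · exact hT d hh
        case hq =>
          intro z hz
          rcases List.mem_append.mp hz with hh | hh
          · exact hq z (List.mem_cons_of_mem _ hh)
          · obtain ⟨cd, rfl, hadj, _⟩ := nbrs_sound hcop hh
            exact ⟨cd, rfl, hreach.tail hadj⟩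
        case hcl =>
          intro c' hc' d hd
          rcases Finset.mem_insert.mp hc' with rfl | hh
          · -- neighbours of the newly visited cell c'
            cases hvd : visGet vis' d.1 d.2 with
            | true =>
              rcases (hvisIff' d).mp hvd with hdV | hdT
              · exact absurd ((hreach.tail hd)) (fun hr => (hV d hdV) hr)
              · exact Or.inl hdT
            | false =>
              exact Or.inr (List.mem_append.mpr (Or.inr (nbrs_complete hd hvd)))
          · rcases hcl c' hh d hd with hh2 | hh2
            · exact Or.inl (Finset.mem_insert_of_mem hh2)
            · rcases List.mem_cons.mp hh2 with hh3 | hh3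
              · exact Or.inl (castC_inj hh3 ▸ Finset.mem_insert_self c T)
              · exact Or.inr (List.mem_append.mpr (Or.inl hh3))
        case hsq =>
          rcases hsq with hh | hh
          · exact Or.inl (Finset.mem_insert_of_mem hh)
          · rcases List.mem_cons.mp hh with hh2 | hh2
            · exact Or.inl (castC_inj hh2 ▸ Finset.mem_insert_self c T)
            · exact Or.inr (List.mem_append.mpr (Or.inl hh2))
        case htot =>
          have hcT : c ∉ T := fun hh => hcnotVT (Or.inr hh)
          rw [Finset.sum_insert hcT, htot]; ring
        case hfuel =>
          have hflip : ((cellsList h w).filter (fun d => visGet vis' d.1 d.2 = false)).length + 1 =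
              ((cellsList h w).filter (fun d => visGet vis d.1 d.2 = false)).length := by
            apply length_filter_flip (cellsList_nodup h w)
              (c := c) (mem_cellsList.mpr ⟨hcop.1, hcop.2.1⟩)
            · rw [hvis]; rfl
            · rw [hget' c.1 c.2, if_pos ⟨rfl, rfl⟩]; rfl
            · intro x hx hxc
              rw [hget' x.1 x.2, if_neg (fun hh => hxc (Prod.ext hh.1 hh.2))]
          have hnlen : (nbrsOf maps h w vis' (c.1 : Int) (c.2 : Int)).length ≤ 4 :=
            List.length_filterMap_le _ _
          simp only [List.length_append, List.length_cons] at hfuel ⊢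
          omega

-- ===== outer scan of A =====

theorem cellsList_length (h w : ℕ) : (cellsList h w).length = h * w := by
  unfold cellsList
  rw [List.length_flatMap]
  simp only [List.length_map, List.length_range]
  simp [List.map_const', List.sum_replicate, smul_eq_mul, Nat.mul_comm]


theorem cellsList_split_lt {h w : ℕ} {done rest : List (ℕ × ℕ)} {c : ℕ × ℕ}
    (hsplit : cellsList h w = done ++ c :: rest) :
    (∀ p ∈ done, encC w p < encC w c) ∧ (∀ d ∈ rest, encC w c < encC w d) := by
  have hpw := cellsList_sorted_enc h w
  rw [hsplit] at hpw
  have h1 := List.pairwise_append.mp hpw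
  exact ⟨fun p hp => h1.2.2 p hp c List.mem_cons_self,
    fun d hd => (List.pairwise_cons.mp h1.2.1).1 d hd⟩


theorem mem_done_of_enc_lt {h w : ℕ} {done rest : List (ℕ × ℕ)} {c : ℕ × ℕ}
    (hsplit : cellsList h w = done ++ c :: rest)
    {d : ℕ × ℕ} (hd1 : d.1 < h) (hd2 : d.2 < w) (hlt : encC w d < encC w c) : d ∈ done := by
  have hdmem : d ∈ cellsList h w := mem_cellsList.mpr ⟨hd1, hd2⟩
  rw [hsplit] at hdmem
  rcases List.mem_append.mp hdmem with hh | hh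
  · exact hh
  · rcases List.mem_cons.mp hh with rfl | hh2
    · omega
    · exact absurd hlt (by have := (cellsList_split_lt hsplit).2 d hh2; omega)


theorem enc_inj_of_bounds {w : ℕ} {a b : ℕ × ℕ} (ha : a.2 < w) (hb : b.2 < w)
    (he : encC w a = encC w b) : a = b := by
  unfold encC at he
  have h1 : a.1 = b.1 := by nlinarith
  exact Prod.ext h1 (by nlinarith)


theorem scanA_spec (maps : List String) (h w : ℕ) :
    ∀ (rest done : List (ℕ × ℕ)) (vis : List (List Bool)) (res : List Int),
    cellsList h w = done ++ rest →
    vis.length = h → (∀ r ∈ vis, r.length = w) →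
    (∀ c : ℕ × ℕ, visGet vis c.1 c.2 = true ↔
      ∃ p ∈ done, opC maps h w p ∧ ReachC maps h w p c) →
    res = (done.filter (fun c => @decide (leadC maps h w c) (Classical.propDecidable _))).map
      (compSumL maps h w) →
    (scanA maps h w rest vis res).2 =
      ((done ++ rest).filter (fun c => @decide (leadC maps h w c) (Classical.propDecidable _))).map
        (compSumL maps h w) := by
  intro rest
  induction rest with
  | nil =>
    intro done vis res hsplit hlen hrow hvisIff hres
    simpa [scanA] using hres
  | cons c rest' ih =>
    intro done vis res hsplit hlen hrow hvisIff hres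
    obtain ⟨ci, cj⟩ := c
    have hcmem : (ci, cj) ∈ cellsList h w := by rw [hsplit]; simp
    have hcb := mem_cellsList.mp hcmem
    have hsplit' : cellsList h w = (done ++ [(ci, cj)]) ++ rest' := by
      rw [hsplit]; simp
    show (scanA maps h w ((ci, cj) :: rest') vis res).2 = _
    rw [scanA]
    by_cases hcond : pvCell maps ci cj ≠ 'X' ∧ visGet vis ci cj = false
    · rw [if_pos hcond]
      have hcop : opC maps h w (ci, cj) := ⟨hcb.1, hcb.2, hcond.1⟩
      have hnodone : ∀ p ∈ done, opC maps h w p → ¬ ReachC maps h w p (ci, cj) := by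
        intro p hp hpo hr
        have : visGet vis ci cj = true := (hvisIff (ci, cj)).mpr ⟨p, hp, hpo, hr⟩
        rw [hcond.2] at this; cases this
      have hlead : leadC maps h w (ci, cj) := by
        refine ⟨hcop, fun d hd => ?_⟩
        by_contra hle
        have hdo : opC maps h w d := reach_open maps h w hcop hd
        have hdd : d ∈ done := mem_done_of_enc_lt hsplit hdo.1 hdo.2.1 (by omega)
        exact hnodone d hdd hdo (reach_symm maps h w hd)
      -- the visited set as a Finset
      have hVdef : ∀ d : ℕ × ℕ,
          d ∈ ((cellsList h w).filter (fun d => visGet vis d.1 d.2)).toFinset ↔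
            visGet vis d.1 d.2 = true := by
        intro d
        simp only [List.mem_toFinset, List.mem_filter]
        constructor
        · exact fun hh => hh.2
        · intro hh
          have hb := visGet_true_bounds vis h w d.1 d.2 hlen hrow hh
          exact ⟨mem_cellsList.mpr hb, hh⟩
      obtain ⟨vis2, hbfseq, hlen2, hrow2, hvis2⟩ :=
        bfs_spec maps h w (ci, cj) hcop (4 * h * w + 1) [castC (ci, cj)] vis 0
          ((cellsList h w).filter (fun d => visGet vis d.1 d.2)).toFinset ∅
          hlen hrow
          (fun d => by
            rw [hVdef d]
            simp only [Finset.notMem_empty, or_false])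
          (fun d hd => by
            rw [hVdef d] at hd
            rcases (hvisIff d).mp hd with ⟨p, hp, hpo, hpr⟩
            intro hr
            exact hnodone p hp hpo (hpr.trans (reach_symm maps h w hr)))
          (fun d hd => absurd hd (Finset.notMem_empty d))
          (fun z hz => by
            rw [List.mem_singleton] at hz
            exact ⟨(ci, cj), hz, Relation.ReflTransGen.refl⟩)
          (fun d hd => absurd hd (Finset.notMem_empty d))
          (Or.inr (List.mem_singleton.mpr rfl))
          (by simp)
          (by
            have h1 := List.length_filter_le (fun d : ℕ × ℕ => visGet vis d.1 d.2 = false)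
              (cellsList h w)
            have h2 := cellsList_length h w
            rw [h2] at h1
            simp only [List.length_singleton]
            rw [Nat.mul_assoc]
            omega)
      show (scanA maps h w rest'
          (bfsA maps h w (4 * h * w + 1) [castC (ci, cj)] vis 0).1
          (res ++ [(bfsA maps h w (4 * h * w + 1) [castC (ci, cj)] vis 0).2])).2 = _
      rw [hbfseq]
      have hshape : done ++ (ci, cj) :: rest' = (done ++ [(ci, cj)]) ++ rest' := by simp
      rw [hshape]
      apply ih (done ++ [(ci, cj)]) vis2 (res ++ [compSumL maps h w (ci, cj)]) hsplit' hlen2 hrow2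
      · intro d
        rw [hvis2 d, hVdef d]
        constructor
        · rintro (hh | hh)
          · rcases (hvisIff d).mp hh with ⟨p, hp, hpo, hpr⟩
            exact ⟨p, by simp [hp], hpo, hpr⟩
          · exact ⟨(ci, cj), by simp, hcop, hh⟩
        · rintro ⟨p, hp, hpo, hpr⟩
          rcases List.mem_append.mp hp with hh | hh
          · exact Or.inl ((hvisIff d).mpr ⟨p, hh, hpo, hpr⟩)
          · rw [List.mem_singleton] at hh
            subst hh
            exact Or.inr hpr
      · rw [hres, List.filter_append, List.map_append]
        congr 1
        have hd : @decide (leadC maps h w (ci, cj)) (Classical.propDecidable _) = true :=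
          @decide_eq_true _ (Classical.propDecidable _) hlead
        simp [List.filter_singleton, hd]
    · rw [if_neg hcond]
      have hcases : pvCell maps ci cj = 'X' ∨ visGet vis ci cj = true := by
        by_cases h1 : pvCell maps ci cj = 'X'
        · exact Or.inl h1
        · right
          by_contra h2
          exact hcond ⟨h1, by simpa using h2⟩
      have hnotlead : ¬ leadC maps h w (ci, cj) := by
        rcases hcases with hh | hh
        · exact fun hl => hl.1.2.2 hh
        · rcases (hvisIff (ci, cj)).mp hh with ⟨p, hp, hpo, hpr⟩
          intro hl
          have hplt := (cellsList_split_lt hsplit).1 p hp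
          have := hl.2 p (reach_symm maps h w hpr)
          omega
      have hshape : done ++ (ci, cj) :: rest' = (done ++ [(ci, cj)]) ++ rest' := by simp
      rw [hshape]
      apply ih (done ++ [(ci, cj)]) vis res hsplit' hlen hrow
      · intro d
        rw [hvisIff d]
        constructor
        · rintro ⟨p, hp, hpo, hpr⟩
          exact ⟨p, by simp [hp], hpo, hpr⟩
        · rintro ⟨p, hp, hpo, hpr⟩
          rcases List.mem_append.mp hp with hh | hh
          · exact ⟨p, hh, hpo, hpr⟩
          · rw [List.mem_singleton] at hh
            subst hh
            rcases hcases with hh2 | hh2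
            · exact absurd hh2 hpo.2.2
            · rcases (hvisIff (ci, cj)).mp hh2 with ⟨p2, hp2, hpo2, hpr2⟩
              exact ⟨p2, hp2, hpo2, hpr2.trans hpr⟩
      · rw [hres, List.filter_append]
        have hd : @decide (leadC maps h w (ci, cj)) (Classical.propDecidable _) = false :=
          @decide_eq_false _ (Classical.propDecidable _) hnotlead
        simp [List.filter_singleton, hd]

-- ===== union-find (B) =====

def pget (p : List ℕ) (x : ℕ) : ℕ := p.getD x x

def InvP (p : List ℕ) : Prop := ∀ k, pget p k ≤ k

def rootp (p : List ℕ) (x : ℕ) : ℕ := pfind p (x + 1) x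


theorem pget_range (n x : ℕ) : pget (List.range n) x = x := by
  unfold pget
  rcases lt_or_ge x n with hx | hx
  · rw [List.getD_eq_getElem _ _ (by simpa using hx)]; simp
  · rw [List.getD_eq_default _ _ (by simpa using hx)]


theorem invP_range (n : ℕ) : InvP (List.range n) := fun k => le_of_eq (pget_range n k)


theorem pfind_fuel (p : List ℕ) (hInv : InvP p) :
    ∀ x, (∀ f, x < f → pfind p f x = rootp p x) ∧ pget p (rootp p x) = rootp p x ∧ rootp p x ≤ x := by
  intro x
  induction x using Nat.strong_induction_on with
  | _ x ih =>
    by_cases hroot : pget p x = x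
    · have hroot' : p.getD x x = x := hroot
      have hr : ∀ f, x < f → pfind p f x = x := by
        intro f hf
        match f, hf with
        | f' + 1, _ =>
          show (if p.getD x x = x then x else pfind p f' (p.getD x x)) = x
          rw [if_pos hroot']
      have hrx : rootp p x = x := hr (x + 1) (Nat.lt_succ_self x)
      exact ⟨fun f hf => by rw [hr f hf, hrx], by rw [hrx]; exact hroot, le_of_eq hrx⟩
    · have hroot' : ¬ p.getD x x = x := hroot
      have hlt : pget p x < x := lt_of_le_of_ne (hInv x) hroot
      obtain ⟨ih1, ih2, ih3⟩ := ih (pget p x) hlt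
      have hstep : ∀ f, x < f → pfind p f x = rootp p (pget p x) := by
        intro f hf
        match f, hf with
        | f' + 1, hf =>
          show (if p.getD x x = x then x else pfind p f' (p.getD x x)) = _
          rw [if_neg hroot']
          exact ih1 f' (by omega)
      have hrx : rootp p x = rootp p (pget p x) := hstep (x + 1) (Nat.lt_succ_self x)
      exact ⟨fun f hf => by rw [hstep f hf, hrx], by rw [hrx]; exact ih2, by omega⟩


theorem rootp_isRoot (p : List ℕ) (hInv : InvP p) (x : ℕ) :
    pget p (rootp p x) = rootp p x := ((pfind_fuel p hInv) x).2.1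

theorem rootp_le (p : List ℕ) (hInv : InvP p) (x : ℕ) : rootp p x ≤ x :=
  ((pfind_fuel p hInv) x).2.2

theorem rootp_of_isRoot (p : List ℕ) {x : ℕ} (hx : pget p x = x) : rootp p x = x := by
  have hx' : p.getD x x = x := hx
  show (if p.getD x x = x then x else pfind p x (p.getD x x)) = x
  rw [if_pos hx']

theorem rootp_step (p : List ℕ) (hInv : InvP p) {x : ℕ} (hx : ¬ pget p x = x) :
    rootp p x = rootp p (pget p x) := by
  have hx' : ¬ p.getD x x = x := hx
  have hlt : pget p x < x := lt_of_le_of_ne (hInv x) hx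
  show (if p.getD x x = x then x else pfind p x (p.getD x x)) = _
  rw [if_neg hx']
  exact ((pfind_fuel p hInv) (pget p x)).1 x hlt


theorem pget_set (p : List ℕ) (r s k : ℕ) (hr : r < p.length) :
    pget (p.set r s) k = if k = r then s else pget p k := by
  unfold pget
  by_cases hk : k = r
  · rw [hk, if_pos rfl, getD_set_self _ _ _ _ hr]
  · rw [if_neg hk, getD_set_ne _ _ _ _ _ (fun hh => hk hh.symm)]


theorem rootp_set (p : List ℕ) (hInv : InvP p) (r s : ℕ) (hroot : pget p r = r)
    (hsroot : pget p s = s) (hsr : s < r) (hrlen : r < p.length) :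
    InvP (p.set r s) ∧ ∀ x, rootp (p.set r s) x = if rootp p x = r then s else rootp p x := by
  have hInv' : InvP (p.set r s) := by
    intro k
    rw [pget_set p r s k hrlen]
    split_ifs with hk
    · omega
    · exact hInv k
  refine ⟨hInv', fun x => ?_⟩
  induction x using Nat.strong_induction_on with
  | _ x ih =>
    by_cases hxr : x = r
    · rw [hxr]
      have hs' : pget (p.set r s) s = s := by
        rw [pget_set p r s s hrlen, if_neg (by omega)]; exact hsroot
      have h1 : pget (p.set r s) r = s := by rw [pget_set p r s r hrlen, if_pos rfl]
      rw [rootp_step (p.set r s) hInv' (by rw [h1]; omega), h1,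
        rootp_of_isRoot _ hs', rootp_of_isRoot p hroot, if_pos rfl]
    · have hpg : pget (p.set r s) x = pget p x := by
        rw [pget_set p r s x hrlen, if_neg hxr]
      by_cases hxroot : pget p x = x
      · rw [rootp_of_isRoot _ (hpg.trans hxroot), rootp_of_isRoot p hxroot, if_neg hxr]
      · have hlt : pget p x < x := lt_of_le_of_ne (hInv x) hxroot
        rw [rootp_step (p.set r s) hInv' (by rw [hpg]; exact hxroot), hpg,
          rootp_step p hInv hxroot, ih (pget p x) hlt]


theorem punion_spec (p : List ℕ) (hInv : InvP p) (a b : ℕ) (ha : a < p.length)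
    (hb : b < p.length) :
    InvP (punion p a b) ∧ (punion p a b).length = p.length ∧
    ∀ x, rootp (punion p a b) x =
      if rootp p x = rootp p a ∨ rootp p x = rootp p b then min (rootp p a) (rootp p b)
      else rootp p x := by
  have hra := rootp_isRoot p hInv a
  have hrb := rootp_isRoot p hInv b
  have hral : rootp p a < p.length := lt_of_le_of_lt (rootp_le p hInv a) ha
  have hrbl : rootp p b < p.length := lt_of_le_of_lt (rootp_le p hInv b) hb
  have hpu : punion p a b =
      if rootp p a = rootp p b then p
      else if rootp p a < rootp p b then p.set (rootp p b) (rootp p a)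
      else p.set (rootp p a) (rootp p b) := rfl
  by_cases heq : rootp p a = rootp p b
  · rw [hpu, if_pos heq]
    refine ⟨hInv, rfl, fun x => ?_⟩
    split_ifs with hh
    · rcases hh with hh | hh
      · omega
      · omega
    · rfl
  · by_cases hlt : rootp p a < rootp p b
    · rw [hpu, if_neg heq, if_pos hlt]
      obtain ⟨hInv', hform⟩ := rootp_set p hInv (rootp p b) (rootp p a) hrb hra hlt hrbl
      refine ⟨hInv', by simp, fun x => ?_⟩
      rw [hform x]
      split_ifs with h1 h2 h2 <;> omega
    · rw [hpu, if_neg heq, if_neg hlt]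
      obtain ⟨hInv', hform⟩ := rootp_set p hInv (rootp p a) (rootp p b) hra hrb (by omega) hral
      refine ⟨hInv', by simp, fun x => ?_⟩
      rw [hform x]
      split_ifs with h1 h2 h2 <;> omega


theorem punion_pres (p : List ℕ) (hInv : InvP p) (a b : ℕ) (ha : a < p.length)
    (hb : b < p.length) {x y : ℕ} (hxy : rootp p x = rootp p y) :
    rootp (punion p a b) x = rootp (punion p a b) y := by
  obtain ⟨_, _, hform⟩ := punion_spec p hInv a b ha hb
  rw [hform x, hform y, hxy]


theorem punion_join (p : List ℕ) (hInv : InvP p) (a b : ℕ) (ha : a < p.length)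
    (hb : b < p.length) :
    rootp (punion p a b) a = rootp (punion p a b) b := by
  obtain ⟨_, _, hform⟩ := punion_spec p hInv a b ha hb
  rw [hform a, hform b]
  split_ifs with h1 h2 <;> omega


theorem punion_new_eq (p : List ℕ) (hInv : InvP p) (a b : ℕ) (ha : a < p.length)
    (hb : b < p.length) {x y : ℕ}
    (hxy : rootp (punion p a b) x = rootp (punion p a b) y) :
    rootp p x = rootp p y ∨
      ((rootp p x = rootp p a ∨ rootp p x = rootp p b) ∧
       (rootp p y = rootp p a ∨ rootp p y = rootp p b)) := by
  obtain ⟨_, _, hform⟩ := punion_spec p hInv a b ha hb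
  rw [hform x, hform y] at hxy
  by_cases hx : rootp p x = rootp p a ∨ rootp p x = rootp p b <;>
    by_cases hy : rootp p y = rootp p a ∨ rootp p y = rootp p b
  · exact Or.inr ⟨hx, hy⟩
  · rw [if_pos hx, if_neg hy] at hxy
    rcases hy with _
    exact Or.inl (by omega)
  · rw [if_neg hx, if_pos hy] at hxy
    exact Or.inl (by omega)
  · rw [if_neg hx, if_neg hy] at hxy
    exact Or.inl hxy

-- ===== B's union pass =====

theorem enc_lt {h w : ℕ} {c : ℕ × ℕ} (h1 : c.1 < h) (h2 : c.2 < w) : encC w c < h * w := by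
  unfold encC
  have e : (c.1 + 1) * w = c.1 * w + w := by ring
  have hle : (c.1 + 1) * w ≤ h * w := Nat.mul_le_mul_right w (by omega)
  omega


def soundP (maps : List String) (h w : ℕ) (p : List ℕ) : Prop :=
  ∀ c d : ℕ × ℕ, opC maps h w c → opC maps h w d →
    rootp p (encC w c) = rootp p (encC w d) → ReachC maps h w c d


theorem union_step_sound {maps : List String} {h w : ℕ} {p : List ℕ} (hInv : InvP p)
    (hlen : p.length = h * w) (hsound : soundP maps h w p) {c d : ℕ × ℕ}
    (hadj : adjC maps h w c d) :
    InvP (punion p (encC w c) (encC w d)) ∧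
    (punion p (encC w c) (encC w d)).length = h * w ∧
    soundP maps h w (punion p (encC w c) (encC w d)) := by
  have hc := hadj.1
  have hd := hadj.2.1
  have hca : encC w c < p.length := by rw [hlen]; exact enc_lt hc.1 hc.2.1
  have hda : encC w d < p.length := by rw [hlen]; exact enc_lt hd.1 hd.2.1
  obtain ⟨hInv', hlen', hform⟩ := punion_spec p hInv (encC w c) (encC w d) hca hda
  refine ⟨hInv', by omega, ?_⟩
  intro c' d' hc' hd' heq
  rcases punion_new_eq p hInv (encC w c) (encC w d) hca hda heq with hold | ⟨hx, hy⟩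
  · exact hsound c' d' hc' hd' hold
  have hcd : ReachC maps h w c d := Relation.ReflTransGen.single hadj
  have hc'r : ReachC maps h w c' c ∨ ReachC maps h w c' d := by
    rcases hx with hh | hh
    · exact Or.inl (hsound c' c hc' hc hh)
    · exact Or.inr (hsound c' d hc' hd hh)
  have hd'r : ReachC maps h w d' c ∨ ReachC maps h w d' d := by
    rcases hy with hh | hh
    · exact Or.inl (hsound d' c hd' hc hh)
    · exact Or.inr (hsound d' d hd' hd hh)
  have hc'd : ReachC maps h w c' d := by
    rcases hc'r with hh | hh
    · exact hh.trans hcd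
    · exact hh
  have hdd' : ReachC maps h w d d' := by
    rcases hd'r with hh | hh
    · exact reach_symm maps h w (hh.trans hcd)
    · exact reach_symm maps h w hh
  exact hc'd.trans hdd'


theorem adj_right {maps : List String} {h w : ℕ} {i j : ℕ} (hi : i < h) (hj : j < w)
    (hcx : pvCell maps i j ≠ 'X') (hj1 : j + 1 < w) (hrx : pvCell maps i (j + 1) ≠ 'X') :
    adjC maps h w (i, j) (i, j + 1) :=
  ⟨⟨hi, hj, hcx⟩, ⟨hi, hj1, hrx⟩, Or.inr (Or.inr (Or.inl ⟨rfl, rfl⟩))⟩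


theorem adj_down {maps : List String} {h w : ℕ} {i j : ℕ} (hi : i < h) (hj : j < w)
    (hcx : pvCell maps i j ≠ 'X') (hi1 : i + 1 < h) (hrx : pvCell maps (i + 1) j ≠ 'X') :
    adjC maps h w (i, j) (i + 1, j) :=
  ⟨⟨hi, hj, hcx⟩, ⟨hi1, hj, hrx⟩, Or.inl ⟨rfl, rfl⟩⟩


theorem enc_right (w i j : ℕ) : i * w + j + 1 = encC w (i, j + 1) := by
  unfold encC; ring

theorem enc_down (w i j : ℕ) : (i + 1) * w + j = encC w (i + 1, j) := rfl

theorem enc_self (w i j : ℕ) : i * w + j = encC w (i, j) := rfl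


theorem unionScan_sound (maps : List String) (h w : ℕ) :
    ∀ (rest : List (ℕ × ℕ)) (p : List ℕ), InvP p → p.length = h * w → soundP maps h w p →
    (∀ c ∈ rest, c.1 < h ∧ c.2 < w) →
    InvP (unionScan maps h w rest p) ∧ (unionScan maps h w rest p).length = h * w ∧
      soundP maps h w (unionScan maps h w rest p) := by
  intro rest
  induction rest with
  | nil => intro p h1 h2 h3 _; exact ⟨h1, h2, h3⟩
  | cons c rest' ih =>
    intro p hInv hlen hsound hbounds
    obtain ⟨i, j⟩ := c
    have hb := hbounds (i, j) List.mem_cons_self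
    have hbounds' : ∀ c ∈ rest', c.1 < h ∧ c.2 < w :=
      fun c hc => hbounds c (List.mem_cons_of_mem _ hc)
    show (InvP (unionScan maps h w ((i, j) :: rest') p)) ∧ _
    rw [unionScan]
    by_cases hcx : pvCell maps i j ≠ 'X'
    · rw [if_pos hcx]
      have step1 : ∀ p', InvP p' → p'.length = h * w → soundP maps h w p' →
          InvP (if j + 1 < w ∧ pvCell maps i (j + 1) ≠ 'X' then
            punion p' (i * w + j) (i * w + j + 1) else p') ∧
          (if j + 1 < w ∧ pvCell maps i (j + 1) ≠ 'X' then
            punion p' (i * w + j) (i * w + j + 1) else p').length = h * w ∧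
          soundP maps h w (if j + 1 < w ∧ pvCell maps i (j + 1) ≠ 'X' then
            punion p' (i * w + j) (i * w + j + 1) else p') := by
        intro p' h1 h2 h3
        split_ifs with hcond
        · rw [enc_right w i j, enc_self w i j]
          exact union_step_sound h1 h2 h3 (adj_right hb.1 hb.2 hcx hcond.1 hcond.2)
        · exact ⟨h1, h2, h3⟩
      have step2 : ∀ p', InvP p' → p'.length = h * w → soundP maps h w p' →
          InvP (if i + 1 < h ∧ pvCell maps (i + 1) j ≠ 'X' then
            punion p' (i * w + j) ((i + 1) * w + j) else p') ∧
          (if i + 1 < h ∧ pvCell maps (i + 1) j ≠ 'X' then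
            punion p' (i * w + j) ((i + 1) * w + j) else p').length = h * w ∧
          soundP maps h w (if i + 1 < h ∧ pvCell maps (i + 1) j ≠ 'X' then
            punion p' (i * w + j) ((i + 1) * w + j) else p') := by
        intro p' h1 h2 h3
        split_ifs with hcond
        · rw [enc_down w i j, enc_self w i j]
          exact union_step_sound h1 h2 h3 (adj_down hb.1 hb.2 hcx hcond.1 hcond.2)
        · exact ⟨h1, h2, h3⟩
      obtain ⟨i1, l1, s1⟩ := step1 p hInv hlen hsound
      obtain ⟨i2, l2, s2⟩ := step2 _ i1 l1 s1
      exact ih _ i2 l2 s2 hbounds'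
    · rw [if_neg hcx]
      exact ih p hInv hlen hsound hbounds'


theorem unionScan_mono (maps : List String) (h w : ℕ) :
    ∀ (rest : List (ℕ × ℕ)) (p : List ℕ), InvP p → p.length = h * w →
    (∀ c ∈ rest, c.1 < h ∧ c.2 < w) → ∀ x y, rootp p x = rootp p y →
    rootp (unionScan maps h w rest p) x = rootp (unionScan maps h w rest p) y := by
  intro rest
  induction rest with
  | nil => intro p _ _ _ x y hxy; exact hxy
  | cons c rest' ih =>
    intro p hInv hlen hbounds x y hxy
    obtain ⟨i, j⟩ := c
    have hb := hbounds (i, j) List.mem_cons_self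
    have hbounds' : ∀ c ∈ rest', c.1 < h ∧ c.2 < w :=
      fun c hc => hbounds c (List.mem_cons_of_mem _ hc)
    show rootp (unionScan maps h w ((i, j) :: rest') p) x = _
    rw [unionScan]
    by_cases hcx : pvCell maps i j ≠ 'X'
    · rw [if_pos hcx]
      have hself : i * w + j < h * w := by
        rw [enc_self w i j]; exact enc_lt hb.1 hb.2
      have step1 : ∀ p', InvP p' → p'.length = h * w → rootp p' x = rootp p' y →
          InvP (if j + 1 < w ∧ pvCell maps i (j + 1) ≠ 'X' then
            punion p' (i * w + j) (i * w + j + 1) else p') ∧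
          (if j + 1 < w ∧ pvCell maps i (j + 1) ≠ 'X' then
            punion p' (i * w + j) (i * w + j + 1) else p').length = h * w ∧
          rootp (if j + 1 < w ∧ pvCell maps i (j + 1) ≠ 'X' then
            punion p' (i * w + j) (i * w + j + 1) else p') x =
          rootp (if j + 1 < w ∧ pvCell maps i (j + 1) ≠ 'X' then
            punion p' (i * w + j) (i * w + j + 1) else p') y := by
        intro p' h1 h2 h3
        split_ifs with hcond
        · have hrb : i * w + j + 1 < p'.length := by
            rw [h2, enc_right w i j]; exact enc_lt hb.1 hcond.1
          obtain ⟨hi, hl, _⟩ := punion_spec p' h1 (i * w + j) (i * w + j + 1) (by omega) hrb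
          exact ⟨hi, by omega, punion_pres p' h1 _ _ (by omega) hrb h3⟩
        · exact ⟨h1, h2, h3⟩
      have step2 : ∀ p', InvP p' → p'.length = h * w → rootp p' x = rootp p' y →
          InvP (if i + 1 < h ∧ pvCell maps (i + 1) j ≠ 'X' then
            punion p' (i * w + j) ((i + 1) * w + j) else p') ∧
          (if i + 1 < h ∧ pvCell maps (i + 1) j ≠ 'X' then
            punion p' (i * w + j) ((i + 1) * w + j) else p').length = h * w ∧
          rootp (if i + 1 < h ∧ pvCell maps (i + 1) j ≠ 'X' then
            punion p' (i * w + j) ((i + 1) * w + j) else p') x =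
          rootp (if i + 1 < h ∧ pvCell maps (i + 1) j ≠ 'X' then
            punion p' (i * w + j) ((i + 1) * w + j) else p') y := by
        intro p' h1 h2 h3
        split_ifs with hcond
        · have hrb : (i + 1) * w + j < p'.length := by
            rw [h2, enc_down w i j]; exact enc_lt hcond.1 hb.2
          obtain ⟨hi, hl, _⟩ := punion_spec p' h1 (i * w + j) ((i + 1) * w + j) (by omega) hrb
          exact ⟨hi, by omega, punion_pres p' h1 _ _ (by omega) hrb h3⟩
        · exact ⟨h1, h2, h3⟩
      obtain ⟨i1, l1, e1⟩ := step1 p hInv hlen hxy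
      obtain ⟨i2, l2, e2⟩ := step2 _ i1 l1 e1
      exact ih _ i2 l2 hbounds' x y e2
    · rw [if_neg hcx]
      exact ih p hInv hlen hbounds' x y hxy


theorem enc_lt' (h w i j : ℕ) (h1 : i < h) (h2 : j < w) : i * w + j < h * w := by
  have e : (i + 1) * w = i * w + w := by ring
  have hle : (i + 1) * w ≤ h * w := Nat.mul_le_mul_right w (by omega)
  omega


theorem unionScan_cons_open (maps : List String) (h w i j : ℕ) (rest : List (ℕ × ℕ))
    (p : List ℕ) (hcx : pvCell maps i j ≠ 'X') :
    unionScan maps h w ((i, j) :: rest) p = unionScan maps h w rest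
      (if i + 1 < h ∧ pvCell maps (i + 1) j ≠ 'X' then
        punion (if j + 1 < w ∧ pvCell maps i (j + 1) ≠ 'X' then
          punion p (i * w + j) (i * w + j + 1) else p) (i * w + j) ((i + 1) * w + j)
      else (if j + 1 < w ∧ pvCell maps i (j + 1) ≠ 'X' then
        punion p (i * w + j) (i * w + j + 1) else p)) := by
  rw [unionScan, if_pos hcx]


theorem unionScan_cons_closed (maps : List String) (h w i j : ℕ) (rest : List (ℕ × ℕ))
    (p : List ℕ) (hcx : ¬ pvCell maps i j ≠ 'X') :
    unionScan maps h w ((i, j) :: rest) p = unionScan maps h w rest p := by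
  rw [unionScan, if_neg hcx]


theorem step12_invlen (maps : List String) (h w i j : ℕ) (hi : i < h) (hj : j < w)
    (p : List ℕ) (hInv : InvP p) (hlen : p.length = h * w) :
    InvP (if i + 1 < h ∧ pvCell maps (i + 1) j ≠ 'X' then
        punion (if j + 1 < w ∧ pvCell maps i (j + 1) ≠ 'X' then
          punion p (i * w + j) (i * w + j + 1) else p) (i * w + j) ((i + 1) * w + j)
      else (if j + 1 < w ∧ pvCell maps i (j + 1) ≠ 'X' then
        punion p (i * w + j) (i * w + j + 1) else p)) ∧
    (if i + 1 < h ∧ pvCell maps (i + 1) j ≠ 'X' then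
        punion (if j + 1 < w ∧ pvCell maps i (j + 1) ≠ 'X' then
          punion p (i * w + j) (i * w + j + 1) else p) (i * w + j) ((i + 1) * w + j)
      else (if j + 1 < w ∧ pvCell maps i (j + 1) ≠ 'X' then
        punion p (i * w + j) (i * w + j + 1) else p)).length = h * w := by
  have hp1 : InvP (if j + 1 < w ∧ pvCell maps i (j + 1) ≠ 'X' then
      punion p (i * w + j) (i * w + j + 1) else p) ∧
      (if j + 1 < w ∧ pvCell maps i (j + 1) ≠ 'X' then
      punion p (i * w + j) (i * w + j + 1) else p).length = h * w := by
    split_ifs with hcond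
    · obtain ⟨hi', hl', _⟩ := punion_spec p hInv (i * w + j) (i * w + j + 1)
        (by rw [hlen]; exact enc_lt' h w i j hi hj)
        (by rw [hlen]; exact enc_lt' h w i (j + 1) hi hcond.1)
      exact ⟨hi', by omega⟩
    · exact ⟨hInv, hlen⟩
  set q := (if j + 1 < w ∧ pvCell maps i (j + 1) ≠ 'X' then
      punion p (i * w + j) (i * w + j + 1) else p) with hq
  split_ifs with hcond
  · obtain ⟨hi', hl', _⟩ := punion_spec q hp1.1 (i * w + j) ((i + 1) * w + j)
      (by rw [hp1.2]; exact enc_lt' h w i j hi hj)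
      (by rw [hp1.2]; exact enc_lt' h w (i + 1) j hcond.1 hj)
    exact ⟨hi', by rw [hl', hp1.2]⟩
  · exact hp1


theorem unionScan_edge (maps : List String) (h w : ℕ) :
    ∀ (rest : List (ℕ × ℕ)) (p : List ℕ), InvP p → p.length = h * w →
    (∀ c ∈ rest, c.1 < h ∧ c.2 < w) → ∀ i j, (i, j) ∈ rest → pvCell maps i j ≠ 'X' →
    ((j + 1 < w ∧ pvCell maps i (j + 1) ≠ 'X' →
      rootp (unionScan maps h w rest p) (i * w + j) =
      rootp (unionScan maps h w rest p) (i * w + j + 1)) ∧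
     (i + 1 < h ∧ pvCell maps (i + 1) j ≠ 'X' →
      rootp (unionScan maps h w rest p) (i * w + j) =
      rootp (unionScan maps h w rest p) ((i + 1) * w + j))) := by
  intro rest
  induction rest with
  | nil => intro p _ _ _ i j hc; cases hc
  | cons hd rest' ih =>
    intro p hInv hlen hbounds i j hc hcx
    obtain ⟨a, b⟩ := hd
    have hb := hbounds (a, b) List.mem_cons_self
    have hbounds' : ∀ c ∈ rest', c.1 < h ∧ c.2 < w :=
      fun c hc => hbounds c (List.mem_cons_of_mem _ hc)
    by_cases hchd : (i, j) = (a, b)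
    · -- the edge's own cell is at the head
      obtain ⟨rfl, rfl⟩ : i = a ∧ j = b := by
        constructor
        · exact congrArg Prod.fst hchd
        · exact congrArg Prod.snd hchd
      rw [unionScan_cons_open maps h w i j rest' p hcx]
      have hij : i * w + j < p.length := by rw [hlen]; exact enc_lt' h w i j hb.1 hb.2
      obtain ⟨ip2, lp2⟩ := step12_invlen maps h w i j hb.1 hb.2 p hInv hlen
      constructor
      · intro hcond1
        apply unionScan_mono maps h w rest' _ ip2 lp2 hbounds'
        -- roots of (i,j) and (i,j+1) already joined in p1, preserved by the second union
        have hr1 : i * w + j + 1 < p.length := by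
          rw [hlen]; exact enc_lt' h w i (j + 1) hb.1 hcond1.1
        have e1 := punion_join p hInv (i * w + j) (i * w + j + 1) (by omega) hr1
        obtain ⟨i1, l1, _⟩ := punion_spec p hInv (i * w + j) (i * w + j + 1) (by omega) hr1
        rw [if_pos hcond1]
        split_ifs with hcond2
        · exact punion_pres _ i1 (i * w + j) ((i + 1) * w + j)
            (by rw [l1, hlen]; exact enc_lt' h w i j hb.1 hb.2)
            (by rw [l1, hlen]; exact enc_lt' h w (i + 1) j hcond2.1 hb.2) e1
        · exact e1
      · intro hcond2
        apply unionScan_mono maps h w rest' _ ip2 lp2 hbounds'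
        rw [if_pos hcond2]
        have hp1il : InvP (if j + 1 < w ∧ pvCell maps i (j + 1) ≠ 'X' then
            punion p (i * w + j) (i * w + j + 1) else p) ∧
            (if j + 1 < w ∧ pvCell maps i (j + 1) ≠ 'X' then
            punion p (i * w + j) (i * w + j + 1) else p).length = h * w := by
          split_ifs with hcond1
          · obtain ⟨hi', hl', _⟩ := punion_spec p hInv (i * w + j) (i * w + j + 1)
              (by omega) (by rw [hlen]; exact enc_lt' h w i (j + 1) hb.1 hcond1.1)
            exact ⟨hi', by rw [hl', hlen]⟩
          · exact ⟨hInv, hlen⟩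
        exact punion_join _ hp1il.1 (i * w + j) ((i + 1) * w + j)
          (by rw [hp1il.2]; exact enc_lt' h w i j hb.1 hb.2)
          (by rw [hp1il.2]; exact enc_lt' h w (i + 1) j hcond2.1 hb.2)
    · -- the edge's cell lies further on
      have hcr : (i, j) ∈ rest' := by
        rcases List.mem_cons.mp hc with hh | hh
        · exact absurd hh hchd
        · exact hh
      by_cases hhx : pvCell maps a b ≠ 'X'
      · rw [unionScan_cons_open maps h w a b rest' p hhx]
        obtain ⟨ip2, lp2⟩ := step12_invlen maps h w a b hb.1 hb.2 p hInv hlen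
        exact ih _ ip2 lp2 hbounds' i j hcr hcx
      · rw [unionScan_cons_closed maps h w a b rest' p hhx]
        exact ih p hInv hlen hbounds' i j hcr hcx


theorem finalP_adj (maps : List String) (h w : ℕ) {c d : ℕ × ℕ} (hadj : adjC maps h w c d) :
    rootp (unionScan maps h w (cellsList h w) (List.range (h * w))) (encC w c) =
    rootp (unionScan maps h w (cellsList h w) (List.range (h * w))) (encC w d) := by
  have hbounds : ∀ x ∈ cellsList h w, x.1 < h ∧ x.2 < w := fun x hx => mem_cellsList.mp hx
  have hInv := invP_range (h * w)
  have hlen : (List.range (h * w)).length = h * w := by simp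
  obtain ⟨hc, hd, hgeo⟩ := hadj
  have hc1 := hc.1
  have hc2 := hc.2.1
  have hd1 := hd.1
  have hd2 := hd.2.1
  have hcm : (c.1, c.2) ∈ cellsList h w := by
    rw [Prod.mk.eta]; exact mem_cellsList.mpr ⟨hc1, hc2⟩
  have hdm : (d.1, d.2) ∈ cellsList h w := by
    rw [Prod.mk.eta]; exact mem_cellsList.mpr ⟨hd1, hd2⟩
  rcases hgeo with ⟨ha, hb⟩ | ⟨ha, hb⟩ | ⟨ha, hb⟩ | ⟨ha, hb⟩
  · have := (unionScan_edge maps h w (cellsList h w) (List.range (h * w)) hInv hlen hbounds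
      c.1 c.2 hcm hc.2.2).2 ⟨by omega, by rw [← ha, ← hb]; exact hd.2.2⟩
    have hde : encC w d = (c.1 + 1) * w + c.2 := by unfold encC; rw [ha, hb]
    rw [hde]
    exact this
  · have := (unionScan_edge maps h w (cellsList h w) (List.range (h * w)) hInv hlen hbounds
      d.1 d.2 hdm hd.2.2).2 ⟨by omega, by rw [← ha, ← hb]; exact hc.2.2⟩
    have hce : encC w c = (d.1 + 1) * w + d.2 := by unfold encC; rw [ha, hb]
    rw [hce]
    exact this.symm
  · have := (unionScan_edge maps h w (cellsList h w) (List.range (h * w)) hInv hlen hbounds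
      c.1 c.2 hcm hc.2.2).1 ⟨by omega, by rw [← ha, ← hb]; exact hd.2.2⟩
    have hde : encC w d = c.1 * w + c.2 + 1 := by unfold encC; rw [ha, hb]; omega
    rw [hde]
    exact this
  · have := (unionScan_edge maps h w (cellsList h w) (List.range (h * w)) hInv hlen hbounds
      d.1 d.2 hdm hd.2.2).1 ⟨by omega, by rw [← ha, ← hb]; exact hc.2.2⟩
    have hce : encC w c = d.1 * w + d.2 + 1 := by unfold encC; rw [ha, hb]; omega
    rw [hce]
    exact this.symm


theorem finalP_rootEq_iff (maps : List String) (h w : ℕ) {c d : ℕ × ℕ}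
    (hc : opC maps h w c) (hd : opC maps h w d) :
    rootp (unionScan maps h w (cellsList h w) (List.range (h * w))) (encC w c) =
    rootp (unionScan maps h w (cellsList h w) (List.range (h * w))) (encC w d) ↔
    ReachC maps h w c d := by
  have hbounds : ∀ x ∈ cellsList h w, x.1 < h ∧ x.2 < w := fun x hx => mem_cellsList.mp hx
  have hsound0 : soundP maps h w (List.range (h * w)) := by
    intro c' d' hc' hd' heq
    rw [rootp_of_isRoot _ (pget_range (h * w) _), rootp_of_isRoot _ (pget_range (h * w) _)] at heq
    have : c' = d' := enc_inj_of_bounds hc'.2.1 hd'.2.1 heq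
    rw [this]
    exact Relation.ReflTransGen.refl
  obtain ⟨hInvF, hlenF, hsoundF⟩ := unionScan_sound maps h w (cellsList h w)
    (List.range (h * w)) (invP_range (h * w)) (by simp) hsound0 hbounds
  constructor
  · exact hsoundF c d hc hd
  · intro hr
    induction hr with
    | refl => rfl
    | tail _ hstep ih => exact (ih hstep.1).trans (finalP_adj maps h w hstep)

-- ===== B's dict pass =====

theorem dict_insert_absent (d : PySem.Dict ℕ Int) (k : ℕ) (v : Int)
    (habs : ∀ p ∈ d.items, p.1 ≠ k) :
    (d.insert k v).items = d.items ++ [(k, v)] ∧ d.getD k 0 = 0 := by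
  have hfind : d.items.find? (fun p => p.1 == k) = none := by
    apply List.find?_eq_none.mpr; intro x hx; simpa using habs x hx
  have hcont : d.contains k = false := by
    show d.items.any (fun p => p.1 == k) = false
    simp only [List.any_eq_false]
    intro x hx; simpa using habs x hx
  constructor
  · show (if d.contains k = true then _ else PySem.Dict.mk (d.items ++ [(k, v)])).items = _
    rw [hcont]
    simp
  · show ((Option.map (fun x => x.2) (d.items.find? (fun p => p.1 == k))).getD 0) = 0
    rw [hfind]
    rfl


theorem dict_insert_present (d : PySem.Dict ℕ Int) (k : ℕ) (v v0 : Int)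
    (L1 L2 : List (ℕ × Int)) (hitems : d.items = L1 ++ (k, v0) :: L2)
    (habs : ∀ p ∈ L1, p.1 ≠ k) :
    (d.insert k v).items = d.items.map (fun p => if p.1 = k then (k, v) else p) ∧
      d.getD k 0 = v0 := by
  have hfind0 : ∀ (M : List (ℕ × Int)), (∀ p ∈ M, p.1 ≠ k) →
      (M ++ (k, v0) :: L2).find? (fun p => p.1 == k) = some (k, v0) := by
    intro M
    induction M with
    | nil => intro _; simp
    | cons a t ih =>
      intro hM
      rw [List.cons_append, List.find?_cons_of_neg (by simpa using hM a List.mem_cons_self)]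
      exact ih (fun p hp => hM p (List.mem_cons_of_mem _ hp))
  have hfind : d.items.find? (fun p => p.1 == k) = some (k, v0) := by
    rw [hitems]; exact hfind0 L1 habs
  have hcont : d.contains k = true := by
    show d.items.any (fun p => p.1 == k) = true
    rw [hitems]
    simp
  constructor
  · have hins : d.insert k v = PySem.Dict.mk
        (d.items.map (fun p => if (p.1 == k) = true then (k, v) else p)) := by
      unfold PySem.Dict.insert
      rw [if_pos hcont]
    rw [hins]
    show d.items.map _ = d.items.map _
    apply List.map_congr_left
    intro p _
    by_cases hp : p.1 = k
    · rw [if_pos (by simpa using hp), if_pos hp]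
    · rw [if_neg (by simpa using hp), if_neg hp]
  · show ((Option.map (fun x => x.2) (d.items.find? (fun p => p.1 == k))).getD 0) = v0
    rw [hfind]
    rfl


noncomputable def partSumL (maps : List String) (h w : ℕ) (ℓ : ℕ × ℕ) (l : List (ℕ × ℕ)) : Int :=
  ((l.filter (fun x => @decide (ReachC maps h w ℓ x) (Classical.propDecidable _))).map
    (fun x => pvVal maps x.1 x.2)).sum


theorem partSumL_append_of_reach (maps : List String) (h w : ℕ) (ℓ c : ℕ × ℕ)
    (l : List (ℕ × ℕ)) (hr : ReachC maps h w ℓ c) :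
    partSumL maps h w ℓ (l ++ [c]) = partSumL maps h w ℓ l + pvVal maps c.1 c.2 := by
  unfold partSumL
  rw [List.filter_append, List.map_append, List.sum_append]
  have hd : @decide (ReachC maps h w ℓ c) (Classical.propDecidable _) = true :=
    @decide_eq_true _ (Classical.propDecidable _) hr
  simp [hd]


theorem partSumL_append_of_not_reach (maps : List String) (h w : ℕ) (ℓ c : ℕ × ℕ)
    (l : List (ℕ × ℕ)) (hr : ¬ ReachC maps h w ℓ c) :
    partSumL maps h w ℓ (l ++ [c]) = partSumL maps h w ℓ l := by
  unfold partSumL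
  rw [List.filter_append, List.map_append, List.sum_append]
  have hd : @decide (ReachC maps h w ℓ c) (Classical.propDecidable _) = false :=
    @decide_eq_false _ (Classical.propDecidable _) hr
  simp [hd]


theorem exists_leader (maps : List String) (h w : ℕ) {c : ℕ × ℕ} (hc : opC maps h w c) :
    ∃ m, leadC maps h w m ∧ ReachC maps h w m c ∧ encC w m ≤ encC w c := by
  classical
  have hcm : c ∈ ((cellsList h w).filter
      (fun x => @decide (ReachC maps h w c x) (Classical.propDecidable _))).toFinset := by
    simp only [List.mem_toFinset, List.mem_filter, decide_eq_true_eq]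
    exact ⟨mem_cellsList.mpr ⟨hc.1, hc.2.1⟩, Relation.ReflTransGen.refl⟩
  obtain ⟨m, hm, hmin⟩ := Finset.exists_min_image _ (encC w) ⟨c, hcm⟩
  simp only [List.mem_toFinset, List.mem_filter, decide_eq_true_eq] at hm
  have hmreach : ReachC maps h w c m := hm.2
  have hmop : opC maps h w m := reach_open maps h w hc hmreach
  refine ⟨m, ⟨hmop, fun d hd => ?_⟩, reach_symm maps h w hmreach, hmin c hcm⟩
  apply hmin
  have hdop : opC maps h w d := reach_open maps h w hmop hd
  simp only [List.mem_toFinset, List.mem_filter, decide_eq_true_eq]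
  exact ⟨mem_cellsList.mpr ⟨hdop.1, hdop.2.1⟩, hmreach.trans hd⟩


theorem partSumL_eq_zero (maps : List String) (h w : ℕ) (ℓ : ℕ × ℕ) (l : List (ℕ × ℕ))
    (hno : ∀ x ∈ l, ¬ ReachC maps h w ℓ x) : partSumL maps h w ℓ l = 0 := by
  unfold partSumL
  rw [List.filter_eq_nil_iff.mpr (fun x hx => by
    simp only [decide_eq_true_eq]
    exact hno x hx)]
  rfl


theorem leaders_root_inj (maps : List String) (h w : ℕ) (P : List ℕ)
    (hiff : ∀ c d : ℕ × ℕ, opC maps h w c → opC maps h w d →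
      (rootp P (encC w c) = rootp P (encC w d) ↔ ReachC maps h w c d))
    {ℓ₁ ℓ₂ : ℕ × ℕ} (h1 : leadC maps h w ℓ₁) (h2 : leadC maps h w ℓ₂)
    (hr : rootp P (encC w ℓ₁) = rootp P (encC w ℓ₂)) : ℓ₁ = ℓ₂ := by
  have hre : ReachC maps h w ℓ₁ ℓ₂ := (hiff ℓ₁ ℓ₂ h1.1 h2.1).mp hr
  have e1 : encC w ℓ₁ ≤ encC w ℓ₂ := h1.2 ℓ₂ hre
  have e2 : encC w ℓ₂ ≤ encC w ℓ₁ := h2.2 ℓ₁ (reach_symm maps h w hre)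
  exact enc_inj_of_bounds h1.1.2.1 h2.1.2.1 (by omega)


theorem sumScan_spec (maps : List String) (h w : ℕ) (P : List ℕ)
    (hiff : ∀ c d : ℕ × ℕ, opC maps h w c → opC maps h w d →
      (rootp P (encC w c) = rootp P (encC w d) ↔ ReachC maps h w c d)) :
    ∀ (rest done : List (ℕ × ℕ)) (d : PySem.Dict ℕ Int),
    cellsList h w = done ++ rest →
    d.items = (done.filter (fun c => @decide (leadC maps h w c) (Classical.propDecidable _))).map
      (fun ℓ => (rootp P (encC w ℓ), partSumL maps h w ℓ done)) →
    (sumScan maps h w P rest d).items =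
      ((cellsList h w).filter (fun c => @decide (leadC maps h w c) (Classical.propDecidable _))).map
        (fun ℓ => (rootp P (encC w ℓ), partSumL maps h w ℓ (cellsList h w))) := by
  intro rest
  induction rest with
  | nil =>
    intro done d hsplit hitems
    have hdone : done = cellsList h w := by rw [hsplit, List.append_nil]
    subst hdone
    simpa [sumScan] using hitems
  | cons c rest' ih =>
    intro done d hsplit hitems
    obtain ⟨ci, cj⟩ := c
    have hcmem : (ci, cj) ∈ cellsList h w := by rw [hsplit]; simp
    have hcb := mem_cellsList.mp hcmem
    have hsplit' : cellsList h w = (done ++ [(ci, cj)]) ++ rest' := by rw [hsplit]; simp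
    have hdonesub : ∀ p ∈ done, encC w p < encC w (ci, cj) := (cellsList_split_lt hsplit).1
    have hleadmem : ∀ ℓ ∈ done.filter
        (fun c => @decide (leadC maps h w c) (Classical.propDecidable _)),
        leadC maps h w ℓ ∧ ℓ ∈ done := by
      intro ℓ hℓ
      obtain ⟨hh1, hh2⟩ := List.mem_filter.mp hℓ
      exact ⟨by simpa using hh2, hh1⟩
    show (sumScan maps h w P ((ci, cj) :: rest') d).items = _
    rw [sumScan]
    by_cases hcx : pvCell maps ci cj ≠ 'X'
    · rw [if_pos hcx]
      have hcop : opC maps h w (ci, cj) := ⟨hcb.1, hcb.2, hcx⟩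
      have hrdef : pfind P (ci * w + cj + 1) (ci * w + cj) = rootp P (encC w (ci, cj)) := rfl
      by_cases hlead : leadC maps h w (ci, cj)
      · -- new component leader: fresh key
        have habs : ∀ p ∈ d.items, p.1 ≠ pfind P (ci * w + cj + 1) (ci * w + cj) := by
          intro p hp
          rw [hitems] at hp
          obtain ⟨ℓ, hℓ, rfl⟩ := List.mem_map.mp hp
          obtain ⟨hℓlead, hℓdone⟩ := hleadmem ℓ hℓ
          rw [hrdef]
          intro hre
          have hreach := (hiff ℓ (ci, cj) hℓlead.1 hcop).mp hre
          have := hlead.2 ℓ (reach_symm maps h w hreach)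
          have := hdonesub ℓ hℓdone
          omega
        obtain ⟨hins, hgd⟩ := dict_insert_absent d _ (d.getD (pfind P (ci * w + cj + 1) (ci * w + cj)) 0 + pvVal maps ci cj) habs
        apply ih (done ++ [(ci, cj)]) _ hsplit'
        rw [hins, hgd, hitems]
        have hfilter : (done ++ [(ci, cj)]).filter
            (fun c => @decide (leadC maps h w c) (Classical.propDecidable _)) =
            done.filter (fun c => @decide (leadC maps h w c) (Classical.propDecidable _)) ++
              [(ci, cj)] := by
          rw [List.filter_append]
          congr 1
          have hd : @decide (leadC maps h w (ci, cj)) (Classical.propDecidable _) = true :=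
            @decide_eq_true _ (Classical.propDecidable _) hlead
          simp [hd]
        rw [hfilter, List.map_append]
        congr 1
        · apply List.map_congr_left
          intro ℓ hℓ
          obtain ⟨hℓlead, hℓdone⟩ := hleadmem ℓ hℓ
          have hnr : ¬ ReachC maps h w ℓ (ci, cj) := by
            intro hre
            have := hlead.2 ℓ (reach_symm maps h w hre)
            have := hdonesub ℓ hℓdone
            omega
          rw [partSumL_append_of_not_reach maps h w ℓ (ci, cj) done hnr]
        · -- the new entry
          have hz : partSumL maps h w (ci, cj) done = 0 := by
            apply partSumL_eq_zero
            intro x hx hre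
            have hxop := reach_open maps h w hcop hre
            have := hlead.2 x hre
            have := hdonesub x hx
            omega
          rw [List.map_singleton, partSumL_append_of_reach maps h w (ci, cj) (ci, cj) done
            Relation.ReflTransGen.refl, hz, hrdef]
      · -- not a leader: its component's leader is already a key
        obtain ⟨m, hmlead, hmreach, hmle⟩ := exists_leader maps h w hcop
        have hmne : m ≠ (ci, cj) := fun hmc => hlead (hmc ▸ hmlead)
        have hmlt : encC w m < encC w (ci, cj) := by
          rcases lt_or_eq_of_le hmle with hh | hh
          · exact hh
          · exact absurd (enc_inj_of_bounds hmlead.1.2.1 hcop.2.1 hh) hmne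
        have hmdone : m ∈ done := mem_done_of_enc_lt hsplit hmlead.1.1 hmlead.1.2.1 hmlt
        have hmfilter : m ∈ done.filter
            (fun c => @decide (leadC maps h w c) (Classical.propDecidable _)) :=
          List.mem_filter.mpr ⟨hmdone, @decide_eq_true _ (Classical.propDecidable _) hmlead⟩
        obtain ⟨A, B, hAB⟩ := List.append_of_mem hmfilter
        have hdonenodup : done.Nodup := by
          have := cellsList_nodup h w
          rw [hsplit] at this
          exact (List.nodup_append.mp this).1
        have hfilnodup : (done.filter
            (fun c => @decide (leadC maps h w c) (Classical.propDecidable _))).Nodup :=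
          hdonenodup.filter _
        have hAmem : ∀ ℓ ∈ A, ℓ ∈ done.filter
            (fun c => @decide (leadC maps h w c) (Classical.propDecidable _)) := by
          intro ℓ hℓ
          rw [hAB]
          exact List.mem_append.mpr (Or.inl hℓ)
        have hAne : ∀ ℓ ∈ A, ℓ ≠ m := by
          have hfn := hfilnodup
          rw [hAB] at hfn
          have hmA : m ∉ A := by
            have h2 : (m :: (A ++ B)).Nodup := List.perm_middle.nodup hfn
            intro hm
            exact (List.nodup_cons.mp h2).1 (List.mem_append.mpr (Or.inl hm))
          intro ℓ hℓ hlm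
          exact hmA (hlm ▸ hℓ)
        have hrm : rootp P (encC w (ci, cj)) = rootp P (encC w m) :=
          (hiff (ci, cj) m hcop hmlead.1).mpr (reach_symm maps h w hmreach)
        have hitems2 : d.items =
            (A.map (fun ℓ => (rootp P (encC w ℓ), partSumL maps h w ℓ done))) ++
            (pfind P (ci * w + cj + 1) (ci * w + cj), partSumL maps h w m done) ::
            (B.map (fun ℓ => (rootp P (encC w ℓ), partSumL maps h w ℓ done))) := by
          rw [hitems, hAB, List.map_append, List.map_cons]
          congr 2
          rw [hrdef, hrm]
        have habs : ∀ p ∈ A.map (fun ℓ => (rootp P (encC w ℓ), partSumL maps h w ℓ done)),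
            p.1 ≠ pfind P (ci * w + cj + 1) (ci * w + cj) := by
          intro p hp
          obtain ⟨ℓ, hℓ, rfl⟩ := List.mem_map.mp hp
          obtain ⟨hℓlead, _⟩ := hleadmem ℓ (hAmem ℓ hℓ)
          rw [hrdef, hrm]
          intro hre
          exact hAne ℓ hℓ (leaders_root_inj maps h w P hiff hℓlead hmlead hre)
        obtain ⟨hins, hgd⟩ := dict_insert_present d _
          (d.getD (pfind P (ci * w + cj + 1) (ci * w + cj)) 0 + pvVal maps ci cj)
          (partSumL maps h w m done) _ _ hitems2 habs
        apply ih (done ++ [(ci, cj)]) _ hsplit'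
        rw [hins, hgd, hitems]
        have hfilter2 : (done ++ [(ci, cj)]).filter
            (fun c => @decide (leadC maps h w c) (Classical.propDecidable _)) =
            done.filter (fun c => @decide (leadC maps h w c) (Classical.propDecidable _)) := by
          rw [List.filter_append]
          have hd : @decide (leadC maps h w (ci, cj)) (Classical.propDecidable _) = false :=
            @decide_eq_false _ (Classical.propDecidable _) hlead
          simp [hd]
        rw [hfilter2, List.map_map]
        apply List.map_congr_left
        intro ℓ hℓ
        obtain ⟨hℓlead, hℓdone⟩ := hleadmem ℓ hℓ
        show (if rootp P (encC w ℓ) = pfind P (ci * w + cj + 1) (ci * w + cj) then _ else _) = _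
        by_cases hℓm : ℓ = m
        · rw [if_pos (by rw [hℓm, hrdef, hrm])]
          rw [hℓm, partSumL_append_of_reach maps h w m (ci, cj) done hmreach, hrdef, hrm]
        · rw [if_neg (fun hre => hℓm (leaders_root_inj maps h w P hiff hℓlead hmlead
            (by rw [hre, hrdef, hrm])))]
          have hnr : ¬ ReachC maps h w ℓ (ci, cj) := by
            intro hre
            exact hℓm (leaders_root_inj maps h w P hiff hℓlead hmlead
              ((hiff ℓ m hℓlead.1 hmlead.1).mpr (hre.trans (reach_symm maps h w hmreach))))
          rw [partSumL_append_of_not_reach maps h w ℓ (ci, cj) done hnr]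
    · rw [if_neg hcx]
      have hnotop : ∀ x : ℕ × ℕ, ReachC maps h w x (ci, cj) → opC maps h w x → False := by
        intro x hxr hxop
        have := reach_open maps h w hxop hxr
        exact hcx (fun hh => this.2.2 hh)
      apply ih (done ++ [(ci, cj)]) d hsplit'
      rw [hitems]
      have hfilter2 : (done ++ [(ci, cj)]).filter
          (fun c => @decide (leadC maps h w c) (Classical.propDecidable _)) =
          done.filter (fun c => @decide (leadC maps h w c) (Classical.propDecidable _)) := by
        rw [List.filter_append]
        have hd : @decide (leadC maps h w (ci, cj)) (Classical.propDecidable _) = false :=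
          @decide_eq_false _ (Classical.propDecidable _)
            (fun hl => hcx (fun hh => hl.1.2.2 hh))
        simp [hd]
      rw [hfilter2]
      apply List.map_congr_left
      intro ℓ hℓ
      obtain ⟨hℓlead, hℓdone⟩ := hleadmem ℓ hℓ
      rw [partSumL_append_of_not_reach maps h w ℓ (ci, cj) done
        (fun hre => hnotop ℓ hre hℓlead.1)]

-- ===== ports (as in final file) =====

theorem solution_eq_alt (maps : List String) : solution maps = solution_alt maps := by
  by_cases hm : maps = []
  · unfold solution solution_alt
    rw [if_pos hm, if_pos hm]
  · unfold solution solution_alt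
    rw [if_neg hm, if_neg hm]
    have hA : (scanA maps maps.length ((maps.headD "").toList.length)
        (cellsList maps.length ((maps.headD "").toList.length))
        (List.replicate maps.length (List.replicate ((maps.headD "").toList.length) false))
        []).2 = canonical maps maps.length ((maps.headD "").toList.length) := by
      have := scanA_spec maps maps.length ((maps.headD "").toList.length)
        (cellsList maps.length ((maps.headD "").toList.length)) []
        (List.replicate maps.length (List.replicate ((maps.headD "").toList.length) false))
        [] (by simp) (by simp)
        (fun r hr => List.eq_of_mem_replicate hr ▸ by simp)
        (fun c => by simp [visGet_replicate])
        (by simp)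
      simpa [canonical, leadersL] using this
    have hiff : ∀ c d : ℕ × ℕ, opC maps maps.length ((maps.headD "").toList.length) c →
        opC maps maps.length ((maps.headD "").toList.length) d →
        (rootp (unionScan maps maps.length ((maps.headD "").toList.length)
            (cellsList maps.length ((maps.headD "").toList.length))
            (List.range (maps.length * ((maps.headD "").toList.length))))
          (encC ((maps.headD "").toList.length) c) =
         rootp (unionScan maps maps.length ((maps.headD "").toList.length)
            (cellsList maps.length ((maps.headD "").toList.length))
            (List.range (maps.length * ((maps.headD "").toList.length))))
          (encC ((maps.headD "").toList.length) d) ↔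
         ReachC maps maps.length ((maps.headD "").toList.length) c d) :=
      fun c d hc hd => ⟨fun he => (by
        obtain ⟨_, _, hsound⟩ := unionScan_sound maps maps.length ((maps.headD "").toList.length)
          (cellsList maps.length ((maps.headD "").toList.length))
          (List.range (maps.length * ((maps.headD "").toList.length)))
          (invP_range _) (by simp)
          (by
            intro c' d' hc' hd' heq
            rw [rootp_of_isRoot _ (pget_range _ _), rootp_of_isRoot _ (pget_range _ _)] at heq
            have : c' = d' := enc_inj_of_bounds hc'.2.1 hd'.2.1 heq
            rw [this]
            exact Relation.ReflTransGen.refl)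
          (fun x hx => mem_cellsList.mp hx)
        exact hsound c d hc hd he), fun hr =>
        (finalP_rootEq_iff maps maps.length ((maps.headD "").toList.length) hc hd).mpr hr⟩
    have hB : (sumScan maps maps.length ((maps.headD "").toList.length)
        (unionScan maps maps.length ((maps.headD "").toList.length)
          (cellsList maps.length ((maps.headD "").toList.length))
          (List.range (maps.length * ((maps.headD "").toList.length))))
        (cellsList maps.length ((maps.headD "").toList.length)) PySem.Dict.empty).values =
        canonical maps maps.length ((maps.headD "").toList.length) := by
      have hit := sumScan_spec maps maps.length ((maps.headD "").toList.length) _ hiff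
        (cellsList maps.length ((maps.headD "").toList.length)) [] PySem.Dict.empty
        (by simp) (by simp [PySem.Dict.empty])
      unfold PySem.Dict.values
      rw [hit, List.map_map]
      unfold canonical leadersL
      apply List.map_congr_left
      intro ℓ _
      rfl
    show (if (scanA maps maps.length ((maps.headD "").toList.length)
        (cellsList maps.length ((maps.headD "").toList.length))
        (List.replicate maps.length (List.replicate ((maps.headD "").toList.length) false))
        []).2 = [] then [-1]
      else PySem.List.sorted (scanA maps maps.length ((maps.headD "").toList.length)
        (cellsList maps.length ((maps.headD "").toList.length))
        (List.replicate maps.length (List.replicate ((maps.headD "").toList.length) false))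
        []).2 (fun x => x) false) = _
    rw [hA]
    show _ = (if (sumScan maps maps.length ((maps.headD "").toList.length)
        (unionScan maps maps.length ((maps.headD "").toList.length)
          (cellsList maps.length ((maps.headD "").toList.length))
          (List.range (maps.length * ((maps.headD "").toList.length))))
        (cellsList maps.length ((maps.headD "").toList.length)) PySem.Dict.empty).values = []
      then [-1]
      else PySem.List.sorted (sumScan maps maps.length ((maps.headD "").toList.length)
        (unionScan maps maps.length ((maps.headD "").toList.length)
          (cellsList maps.length ((maps.headD "").toList.length))
          (List.range (maps.length * ((maps.headD "").toList.length))))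
        (cellsList maps.length ((maps.headD "").toList.length)) PySem.Dict.empty).values
        (fun x => x) false)
    rw [hB]


-- ===== VERDICT (by name: the statement is the Claim_ definition above) =====
theorem solution_spec : Claim_equal_solution := by
  intro maps _ _
  unfold Spec_solution
  exact solution_eq_alt maps
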